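-- pv_equiv track=rewrite | github.com/sumopht/2110101-com-prog | grader/07_StrFile_32.py | number_sequence
-- ===== SOURCE A (Python) =====
-- def number_sequence(t):
--     sequence = ['0', '1', '2', '3', '4', '5', '6', '7', '8', '9']
--     for i in range(len(t)):
--         count = 0
--         try:
--             index = sequence.index(t[i])
--         except:
--             continue
--         try:
--             # increase
--             if t[i].upper() == sequence[index]:
--                 count += 1
--             if t[i + 1].upper() == sequence[index + 1]:
--                 count += 1
--             if t[i + 2].upper() == sequence[index + 2]:
--                 count += 1
--             if t[i + 3].upper() == sequence[index + 3]:
--                 count += 1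
--             if count == 4:
--                 return True
--         except:
--             pass
--         try:
--             # decrease
--             count = 0
--             if t[i].upper() == sequence[index]:
--                 count += 1
--             if t[i + 1].upper() == sequence[index - 1]:
--                 count += 1
--             if t[i + 2].upper() == sequence[index - 2]:
--                 count += 1
--             if t[i + 3].upper() == sequence[index - 3]:
--                 count += 1
--             if count == 4:
--                 return True
--         except:
--             pass
--     return False
-- ===== SOURCE B (Python) =====
-- def number_sequence(t):
--     asc = desc = 0
--     prev = None
--     for c in t:
--         if '0' <= c <= '9':
--             d = ord(c) - 48
--             asc = asc + 1 if prev is not None and d == prev + 1 else 1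
--             desc = desc + 1 if prev is not None and d == prev - 1 else 1
--             if asc == 4 or desc == 4:
--                 return True
--             prev = d
--         else:
--             asc = desc = 0
--             prev = None
--     return False
-- ===== Notes on version B (the rewrite author's own statement) =====
-- stated objective: faster
-- what changed: A re-scans a fixed 4-character look-ahead window (a list.index scan plus exception-guarded indexing) at every position; B is a single left-to-right pass maintaining running ascending/descending run-length counters and the previous digit, returning True as soon as a counter reaches 4.
-- intended difference: On strings whose only 4-character digit run is a descending run wrapping from 0 to 9 (e.g. '0987', '2109'), A returns True because sequence[index-k] silently hits Python's negative-index wraparound, while B returns False, the intended answer since such digits are not four consecutive descending digits. — e.g. on number_sequence("0987"): A returns true, B returns false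
import Mathlib
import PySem

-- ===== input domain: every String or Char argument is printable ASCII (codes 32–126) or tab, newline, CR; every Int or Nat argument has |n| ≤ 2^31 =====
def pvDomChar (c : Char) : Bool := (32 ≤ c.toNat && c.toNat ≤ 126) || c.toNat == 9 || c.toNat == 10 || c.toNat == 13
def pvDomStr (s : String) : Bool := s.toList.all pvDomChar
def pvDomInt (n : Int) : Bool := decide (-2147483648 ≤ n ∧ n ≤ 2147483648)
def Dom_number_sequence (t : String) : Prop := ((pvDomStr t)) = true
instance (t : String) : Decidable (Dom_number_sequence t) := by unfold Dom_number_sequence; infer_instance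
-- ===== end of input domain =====

-- B replaces A's per-position 4-character look-ahead windows by one pass with running
-- ascending/descending run-length counters; on wrap-only descending windows (see D_ below) the
-- two programs intentionally differ.

-- ===== PORT A =====
-- sequence = ['0', …, '9']
def pvSeq : List Char := ['0', '1', '2', '3', '4', '5', '6', '7', '8', '9']

-- first try-block ("increase"): Python returns True from it iff no lookup raises
-- (t[i+k] in range, sequence[index+k] in range) and count == 4; any IndexError
-- inside the try aborts it without returning, which is exactly the fall-through case
def pvAscTry (l : List Char) (i : Int) (idx : Int) : Bool :=
  match PySem.List.pyGet? l i, PySem.List.pyGet? pvSeq idx,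
        PySem.List.pyGet? l (i+1), PySem.List.pyGet? pvSeq (idx+1),
        PySem.List.pyGet? l (i+2), PySem.List.pyGet? pvSeq (idx+2),
        PySem.List.pyGet? l (i+3), PySem.List.pyGet? pvSeq (idx+3) with
  | some a0, some s0, some a1, some s1, some a2, some s2, some a3, some s3 =>
      ((if PySem.Chars.upperChar a0 == s0 then 1 else 0)
       + (if PySem.Chars.upperChar a1 == s1 then 1 else 0)
       + (if PySem.Chars.upperChar a2 == s2 then 1 else 0)
       + (if PySem.Chars.upperChar a3 == s3 then 1 else 0) : Nat) == 4
  | _, _, _, _, _, _, _, _ => false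

-- second try-block ("decrease"); sequence[index-k] wraps around for negative
-- indices exactly as pyGet? does
def pvDescTry (l : List Char) (i : Int) (idx : Int) : Bool :=
  match PySem.List.pyGet? l i, PySem.List.pyGet? pvSeq idx,
        PySem.List.pyGet? l (i+1), PySem.List.pyGet? pvSeq (idx-1),
        PySem.List.pyGet? l (i+2), PySem.List.pyGet? pvSeq (idx-2),
        PySem.List.pyGet? l (i+3), PySem.List.pyGet? pvSeq (idx-3) with
  | some a0, some s0, some a1, some s1, some a2, some s2, some a3, some s3 =>
      ((if PySem.Chars.upperChar a0 == s0 then 1 else 0)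
       + (if PySem.Chars.upperChar a1 == s1 then 1 else 0)
       + (if PySem.Chars.upperChar a2 == s2 then 1 else 0)
       + (if PySem.Chars.upperChar a3 == s3 then 1 else 0) : Nat) == 4
  | _, _, _, _, _, _, _, _ => false

-- for i in range(len(t)) with early return True; t[i] sits outside any try but
-- cannot raise for i produced by range(len(t))
def pvAGo (l : List Char) : List Int → Bool
  | [] => false
  | i :: rest =>
    match PySem.List.pyGet? l i with
    | none => false   -- unreachable for i ∈ range(len(t))
    | some c =>
      match PySem.List.index? pvSeq c with
      | none => pvAGo l rest                       -- except ValueError: continue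
      | some idx =>
        if pvAscTry l i ((idx : Nat) : Int) then true
        else if pvDescTry l i ((idx : Nat) : Int) then true
        else pvAGo l rest

def number_sequence (t : String) : Bool :=
  pvAGo t.toList (PySem.List.pyRange 0 (t.toList.length : Int) 1)

-- ===== PORT B =====
-- '0' <= c <= '9'
def pvDigB (c : Char) : Bool := decide ('0' ≤ c ∧ c ≤ '9')
-- d = ord(c) - 48
def pvDv (c : Char) : Int := (c.toNat : Int) - 48

-- one pass, state = (asc run length, desc run length, previous digit)
def pvBGo : List Char → Int → Int → Option Int → Bool
  | [], _, _, _ => false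
  | c :: rest, asc, desc, prev =>
    if pvDigB c then
      let d : Int := pvDv c
      let asc' : Int := match prev with
        | some p => if d == p + 1 then asc + 1 else 1
        | none => 1
      let desc' : Int := match prev with
        | some p => if d == p - 1 then desc + 1 else 1
        | none => 1
      if asc' == 4 || desc' == 4 then true else pvBGo rest asc' desc' (some d)
    else pvBGo rest 0 0 none

def number_sequence_alt (t : String) : Bool := pvBGo t.toList 0 0 none

-- ===== PRECONDITION & SPEC =====
-- D_ is stated through literal 4-character digit windows: one of the three wrapping
-- descending windows "0987"/"1098"/"2109" occurs in t, and none of the fourteen plain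
-- ascending or descending windows does.

-- On strings whose only 4-character digit run is a descending run wrapping from 0 to 9
-- (e.g. "0987", "2109"), A returns True because sequence[index-k] silently hits Python's
-- negative-index wraparound, while B returns False, the intended answer since such digits
-- are not four consecutive descending digits.
def D_number_sequence (t : String) : Prop :=
  (∃ w ∈ ["0987", "1098", "2109"], PySem.Str.isIn w t = true) ∧
  (∀ w ∈ ["0123", "1234", "2345", "3456", "4567", "5678", "6789",
          "3210", "4321", "5432", "6543", "7654", "8765", "9876"], PySem.Str.isIn w t = false)
instance (t : String) : Decidable (D_number_sequence t) := by unfold D_number_sequence; infer_instance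

def Spec_number_sequence (t : String) (out : Bool) : Prop := ¬ D_number_sequence t → out = number_sequence_alt t
instance (t : String) (out : Bool) : Decidable (Spec_number_sequence t out) := by unfold Spec_number_sequence; infer_instance

def pvDiffWitness_number_sequence : String := "0987"
def pvDiffWitnessOut_number_sequence : Bool × Bool := (true, false)

-- ===== CLAIM (what is proved, stated in full; the proofs are below) =====
def Claim_unchanged_number_sequence : Prop := ∀ (t : String), Dom_number_sequence t → Spec_number_sequence t (number_sequence t)
def Claim_changed_number_sequence : Prop := Dom_number_sequence (pvDiffWitness_number_sequence) ∧ D_number_sequence (pvDiffWitness_number_sequence) ∧ number_sequence (pvDiffWitness_number_sequence) = pvDiffWitnessOut_number_sequence.1 ∧ number_sequence_alt (pvDiffWitness_number_sequence) = pvDiffWitnessOut_number_sequence.2 ∧ pvDiffWitnessOut_number_sequence.1 ≠ pvDiffWitnessOut_number_sequence.2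
def Claim_exact_number_sequence : Prop := ∀ (t : String), Dom_number_sequence t → D_number_sequence t → number_sequence t ≠ number_sequence_alt t

-- ===== LEMMAS AND PROOFS =====

-- Boolean window scans used by the proofs: a run of 4 digit characters that
-- ascends by 1 (pvContA), descends by 1 wrapping 0 -> 9 (pvContD), or descends by 1 with no
-- wrap (pvContDn), starting at some position (pvHasA / pvHasD / pvHasDn).
def pvDigW (c : Char) : Bool := decide (48 ≤ c.toNat ∧ c.toNat ≤ 57)
def pvDvW (c : Char) : Int := Int.subNatNat c.toNat 48

def pvContA : List Char → Int → Nat → Bool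
  | _, _, 0 => true
  | [], _, _ + 1 => false
  | c :: rest, p, m + 1 => pvDigW c && (pvDvW c == p + 1) && pvContA rest (p + 1) m

def pvContD : List Char → Int → Nat → Bool
  | _, _, 0 => true
  | [], _, _ + 1 => false
  | c :: rest, p, m + 1 =>
      pvDigW c && (pvDvW c == PySem.Int.mod (p - 1) 10) && pvContD rest (PySem.Int.mod (p - 1) 10) m

def pvContDn : List Char → Int → Nat → Bool
  | _, _, 0 => true
  | [], _, _ + 1 => false
  | c :: rest, p, m + 1 => pvDigW c && (pvDvW c == p - 1) && pvContDn rest (p - 1) m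

def pvHasA : List Char → Bool
  | [] => false
  | c :: rest => (pvDigW c && pvContA rest (pvDvW c) 3) || pvHasA rest

def pvHasD : List Char → Bool
  | [] => false
  | c :: rest => (pvDigW c && pvContD rest (pvDvW c) 3) || pvHasD rest

def pvHasDn : List Char → Bool
  | [] => false
  | c :: rest => (pvDigW c && pvContDn rest (pvDvW c) 3) || pvHasDn rest


-- A equals "some position starts an ascending or wrap-descending window" (pvAnyWin),
-- B equals "some position starts an ascending or no-wrap-descending window".

def pvAnyWin : List Char → Bool
  | [] => false
  | c :: rest => (pvDigW c && pvContA rest (pvDvW c) 3) || (pvDigW c && pvContD rest (pvDvW c) 3) || pvAnyWin rest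

-- generic character facts
lemma pvChar_eq_iff_toNat (a b : Char) : a = b ↔ a.toNat = b.toNat := by
  constructor
  · intro h; rw [h]
  · intro h
    have := Char.ofNat_toNat a
    rw [h, Char.ofNat_toNat] at this
    exact this.symm

lemma pvDigW_iff (c : Char) : pvDigW c = true ↔ 48 ≤ c.toNat ∧ c.toNat ≤ 57 := by
  simp [pvDigW]

lemma pvMem_seq_iff (c : Char) : c ∈ pvSeq ↔ pvDigW c = true := by
  rw [pvDigW_iff]
  simp [pvSeq, pvChar_eq_iff_toNat]
  constructor
  · rintro (h|h|h|h|h|h|h|h|h|h) <;> simp [h]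
  · intro h; omega

lemma pvUpper_eq_digit (a d : Char) (hd : 48 ≤ d.toNat) (hd' : d.toNat ≤ 57) :
    (PySem.Chars.upperChar a == d) = (a == d) := by
  unfold PySem.Chars.upperChar
  by_cases h : PySem.Chars.islower a = true
  · rw [if_pos h]
    unfold PySem.Chars.islower at h
    simp only [Bool.and_eq_true, decide_eq_true_eq] at h
    obtain ⟨h1, h2⟩ := h
    rw [Char.le_def, UInt32.le_iff_toNat_le] at h1 h2
    have ha1 : 97 ≤ a.toNat := h1
    have ha2 : a.toNat ≤ 122 := h2
    have hv : (a.toNat - 32).isValidChar := Or.inl (by omega)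
    have ht : (Char.ofNat (a.toNat - 32)).toNat = a.toNat - 32 := by
      simp [Char.toNat_ofNat, hv]
    have e1 : (Char.ofNat (a.toNat - 32) == d) = false := by
      rw [beq_eq_false_iff_ne]
      intro he
      rw [pvChar_eq_iff_toNat, ht] at he
      omega
    have e2 : (a == d) = false := by
      rw [beq_eq_false_iff_ne]
      intro he
      rw [pvChar_eq_iff_toNat] at he
      omega
    rw [e1, e2]
  · rw [if_neg h]

lemma pvChar_eq_digit_iff (a d : Char) (hd : pvDigW d = true) :
    (a == d) = (pvDigW a && (pvDvW a == pvDvW d)) := by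
  by_cases h : a = d
  · subst h; simp [hd]
  · have e : (a == d) = false := by rw [beq_eq_false_iff_ne]; exact h
    rw [e]
    cases ha : pvDigW a
    · simp
    · simp only [Bool.true_and]
      symm
      rw [beq_eq_false_iff_ne]
      intro he
      apply h
      rw [pvChar_eq_iff_toNat]
      unfold pvDvW at he
      rw [Int.subNatNat_eq_coe, Int.subNatNat_eq_coe] at he
      omega

lemma pvIndex?_seq (c : Char) :
    PySem.List.index? pvSeq c = if pvDigW c then some (c.toNat - 48) else none := by
  cases hd : pvDigW c
  · rw [if_neg (by simp)]
    rw [PySem.List.index?_eq_none_iff]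
    intro hmem
    rw [pvMem_seq_iff c, hd] at hmem
    exact Bool.noConfusion hmem
  · rw [if_pos rfl]
    have hm : c ∈ pvSeq := (pvMem_seq_iff c).2 hd
    simp only [pvSeq, List.mem_cons, List.not_mem_nil, or_false] at hm
    rcases hm with h|h|h|h|h|h|h|h|h|h <;> subst h <;> decide

lemma pvDig_dv_ne (a : Char) (v : Int) (hv : 9 < v) : (pvDigW a && (pvDvW a == v)) = false := by
  cases h : pvDigW a
  · simp
  · have := (pvDigW_iff a).1 h
    simp only [Bool.true_and]
    rw [beq_eq_false_iff_ne]
    unfold pvDvW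
    rw [Int.subNatNat_eq_coe]
    omega

lemma pvAscTry_eq (l : List Char) (i : Nat) (c : Char) (hc : l[i]? = some c) (hd : pvDigW c = true) :
    pvAscTry l (i : Int) ((c.toNat - 48 : Nat) : Int) = pvContA (l.drop (i+1)) (pvDvW c) 3 := by
  have hdig := (pvDigW_iff c).1 hd
  obtain ⟨k, hk, hck⟩ : ∃ k, k ≤ 9 ∧ c.toNat = 48 + k := ⟨c.toNat - 48, by omega, by omega⟩
  have hgets : PySem.List.pyGet? l (i : Int) = some c := by simp [hc]
  have e1 : ((i:Int)+1) = ((i+1:Nat):Int) := by push_cast; ring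
  have e2 : ((i:Int)+2) = ((i+2:Nat):Int) := by push_cast; ring
  have e3 : ((i:Int)+3) = ((i+3:Nat):Int) := by push_cast; ring
  interval_cases k
  · have hcv : c = '0' := by rw [pvChar_eq_iff_toNat, hck]; decide
    subst hcv
    simp only [pvAscTry, hgets, e1, e2, e3, PySem.List.pyGet?_natCast]
    have s0 : pvSeq['0'.toNat - 48]? = some '0' := by decide
    have s1 : PySem.List.pyGet? pvSeq ((('0'.toNat - 48 : Nat) : Int) + 1) = some '1' := by decide
    have s2 : PySem.List.pyGet? pvSeq ((('0'.toNat - 48 : Nat) : Int) + 2) = some '2' := by decide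
    have s3 : PySem.List.pyGet? pvSeq ((('0'.toNat - 48 : Nat) : Int) + 3) = some '3' := by decide
    simp only [s0, s1, s2, s3]
    rcases h1 : l[i+1]? with _ | a1
    · have d1 : l.drop (i+1) = [] := by rw [List.drop_eq_nil_iff]; exact List.getElem?_eq_none_iff.1 h1
      simp [d1, pvContA]
    obtain ⟨hl1, hg1⟩ := List.getElem?_eq_some_iff.mp h1
    have d1 : l.drop (i+1) = a1 :: l.drop (i+2) := by rw [List.drop_eq_getElem_cons hl1, hg1]
    rcases h2 : l[i+2]? with _ | a2
    · have d2 : l.drop (i+2) = [] := by rw [List.drop_eq_nil_iff]; exact List.getElem?_eq_none_iff.1 h2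
      simp [d1, d2, pvContA]
    obtain ⟨hl2, hg2⟩ := List.getElem?_eq_some_iff.mp h2
    have d2 : l.drop (i+2) = a2 :: l.drop (i+3) := by rw [List.drop_eq_getElem_cons hl2, hg2]
    rcases h3 : l[i+3]? with _ | a3
    · have d3 : l.drop (i+3) = [] := by rw [List.drop_eq_nil_iff]; exact List.getElem?_eq_none_iff.1 h3
      simp [d1, d2, d3, pvContA]
    obtain ⟨hl3, hg3⟩ := List.getElem?_eq_some_iff.mp h3
    have d3 : l.drop (i+3) = a3 :: l.drop (i+4) := by rw [List.drop_eq_getElem_cons hl3, hg3]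
    simp only [d1, d2, d3, pvContA]
    rw [pvUpper_eq_digit a1 '1' (by decide) (by decide), pvChar_eq_digit_iff a1 '1' (by decide)]
    have p1 : pvDvW '1' = pvDvW '0' + 1 := by decide
    rw [pvUpper_eq_digit a2 '2' (by decide) (by decide), pvChar_eq_digit_iff a2 '2' (by decide)]
    have p2 : pvDvW '2' = pvDvW '0' + 1 + 1 := by decide
    rw [pvUpper_eq_digit a3 '3' (by decide) (by decide), pvChar_eq_digit_iff a3 '3' (by decide)]
    have p3 : pvDvW '3' = pvDvW '0' + 1 + 1 + 1 := by decide
    rw [p1, p2, p3]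
    cases hb1 : pvDigW a1 && (pvDvW a1 == pvDvW '0' + 1) <;> cases hb2 : pvDigW a2 && (pvDvW a2 == pvDvW '0' + 1 + 1) <;> cases hb3 : pvDigW a3 && (pvDvW a3 == pvDvW '0' + 1 + 1 + 1) <;>
      simp [hb1, hb2, hb3, show PySem.Chars.upperChar '0' = '0' from by decide]
  · have hcv : c = '1' := by rw [pvChar_eq_iff_toNat, hck]; decide
    subst hcv
    simp only [pvAscTry, hgets, e1, e2, e3, PySem.List.pyGet?_natCast]
    have s0 : pvSeq['1'.toNat - 48]? = some '1' := by decide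
    have s1 : PySem.List.pyGet? pvSeq ((('1'.toNat - 48 : Nat) : Int) + 1) = some '2' := by decide
    have s2 : PySem.List.pyGet? pvSeq ((('1'.toNat - 48 : Nat) : Int) + 2) = some '3' := by decide
    have s3 : PySem.List.pyGet? pvSeq ((('1'.toNat - 48 : Nat) : Int) + 3) = some '4' := by decide
    simp only [s0, s1, s2, s3]
    rcases h1 : l[i+1]? with _ | a1
    · have d1 : l.drop (i+1) = [] := by rw [List.drop_eq_nil_iff]; exact List.getElem?_eq_none_iff.1 h1
      simp [d1, pvContA]
    obtain ⟨hl1, hg1⟩ := List.getElem?_eq_some_iff.mp h1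
    have d1 : l.drop (i+1) = a1 :: l.drop (i+2) := by rw [List.drop_eq_getElem_cons hl1, hg1]
    rcases h2 : l[i+2]? with _ | a2
    · have d2 : l.drop (i+2) = [] := by rw [List.drop_eq_nil_iff]; exact List.getElem?_eq_none_iff.1 h2
      simp [d1, d2, pvContA]
    obtain ⟨hl2, hg2⟩ := List.getElem?_eq_some_iff.mp h2
    have d2 : l.drop (i+2) = a2 :: l.drop (i+3) := by rw [List.drop_eq_getElem_cons hl2, hg2]
    rcases h3 : l[i+3]? with _ | a3
    · have d3 : l.drop (i+3) = [] := by rw [List.drop_eq_nil_iff]; exact List.getElem?_eq_none_iff.1 h3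
      simp [d1, d2, d3, pvContA]
    obtain ⟨hl3, hg3⟩ := List.getElem?_eq_some_iff.mp h3
    have d3 : l.drop (i+3) = a3 :: l.drop (i+4) := by rw [List.drop_eq_getElem_cons hl3, hg3]
    simp only [d1, d2, d3, pvContA]
    rw [pvUpper_eq_digit a1 '2' (by decide) (by decide), pvChar_eq_digit_iff a1 '2' (by decide)]
    have p1 : pvDvW '2' = pvDvW '1' + 1 := by decide
    rw [pvUpper_eq_digit a2 '3' (by decide) (by decide), pvChar_eq_digit_iff a2 '3' (by decide)]
    have p2 : pvDvW '3' = pvDvW '1' + 1 + 1 := by decide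
    rw [pvUpper_eq_digit a3 '4' (by decide) (by decide), pvChar_eq_digit_iff a3 '4' (by decide)]
    have p3 : pvDvW '4' = pvDvW '1' + 1 + 1 + 1 := by decide
    rw [p1, p2, p3]
    cases hb1 : pvDigW a1 && (pvDvW a1 == pvDvW '1' + 1) <;> cases hb2 : pvDigW a2 && (pvDvW a2 == pvDvW '1' + 1 + 1) <;> cases hb3 : pvDigW a3 && (pvDvW a3 == pvDvW '1' + 1 + 1 + 1) <;>
      simp [hb1, hb2, hb3, show PySem.Chars.upperChar '1' = '1' from by decide]
  · have hcv : c = '2' := by rw [pvChar_eq_iff_toNat, hck]; decide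
    subst hcv
    simp only [pvAscTry, hgets, e1, e2, e3, PySem.List.pyGet?_natCast]
    have s0 : pvSeq['2'.toNat - 48]? = some '2' := by decide
    have s1 : PySem.List.pyGet? pvSeq ((('2'.toNat - 48 : Nat) : Int) + 1) = some '3' := by decide
    have s2 : PySem.List.pyGet? pvSeq ((('2'.toNat - 48 : Nat) : Int) + 2) = some '4' := by decide
    have s3 : PySem.List.pyGet? pvSeq ((('2'.toNat - 48 : Nat) : Int) + 3) = some '5' := by decide
    simp only [s0, s1, s2, s3]
    rcases h1 : l[i+1]? with _ | a1
    · have d1 : l.drop (i+1) = [] := by rw [List.drop_eq_nil_iff]; exact List.getElem?_eq_none_iff.1 h1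
      simp [d1, pvContA]
    obtain ⟨hl1, hg1⟩ := List.getElem?_eq_some_iff.mp h1
    have d1 : l.drop (i+1) = a1 :: l.drop (i+2) := by rw [List.drop_eq_getElem_cons hl1, hg1]
    rcases h2 : l[i+2]? with _ | a2
    · have d2 : l.drop (i+2) = [] := by rw [List.drop_eq_nil_iff]; exact List.getElem?_eq_none_iff.1 h2
      simp [d1, d2, pvContA]
    obtain ⟨hl2, hg2⟩ := List.getElem?_eq_some_iff.mp h2
    have d2 : l.drop (i+2) = a2 :: l.drop (i+3) := by rw [List.drop_eq_getElem_cons hl2, hg2]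
    rcases h3 : l[i+3]? with _ | a3
    · have d3 : l.drop (i+3) = [] := by rw [List.drop_eq_nil_iff]; exact List.getElem?_eq_none_iff.1 h3
      simp [d1, d2, d3, pvContA]
    obtain ⟨hl3, hg3⟩ := List.getElem?_eq_some_iff.mp h3
    have d3 : l.drop (i+3) = a3 :: l.drop (i+4) := by rw [List.drop_eq_getElem_cons hl3, hg3]
    simp only [d1, d2, d3, pvContA]
    rw [pvUpper_eq_digit a1 '3' (by decide) (by decide), pvChar_eq_digit_iff a1 '3' (by decide)]
    have p1 : pvDvW '3' = pvDvW '2' + 1 := by decide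
    rw [pvUpper_eq_digit a2 '4' (by decide) (by decide), pvChar_eq_digit_iff a2 '4' (by decide)]
    have p2 : pvDvW '4' = pvDvW '2' + 1 + 1 := by decide
    rw [pvUpper_eq_digit a3 '5' (by decide) (by decide), pvChar_eq_digit_iff a3 '5' (by decide)]
    have p3 : pvDvW '5' = pvDvW '2' + 1 + 1 + 1 := by decide
    rw [p1, p2, p3]
    cases hb1 : pvDigW a1 && (pvDvW a1 == pvDvW '2' + 1) <;> cases hb2 : pvDigW a2 && (pvDvW a2 == pvDvW '2' + 1 + 1) <;> cases hb3 : pvDigW a3 && (pvDvW a3 == pvDvW '2' + 1 + 1 + 1) <;>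
      simp [hb1, hb2, hb3, show PySem.Chars.upperChar '2' = '2' from by decide]
  · have hcv : c = '3' := by rw [pvChar_eq_iff_toNat, hck]; decide
    subst hcv
    simp only [pvAscTry, hgets, e1, e2, e3, PySem.List.pyGet?_natCast]
    have s0 : pvSeq['3'.toNat - 48]? = some '3' := by decide
    have s1 : PySem.List.pyGet? pvSeq ((('3'.toNat - 48 : Nat) : Int) + 1) = some '4' := by decide
    have s2 : PySem.List.pyGet? pvSeq ((('3'.toNat - 48 : Nat) : Int) + 2) = some '5' := by decide
    have s3 : PySem.List.pyGet? pvSeq ((('3'.toNat - 48 : Nat) : Int) + 3) = some '6' := by decide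
    simp only [s0, s1, s2, s3]
    rcases h1 : l[i+1]? with _ | a1
    · have d1 : l.drop (i+1) = [] := by rw [List.drop_eq_nil_iff]; exact List.getElem?_eq_none_iff.1 h1
      simp [d1, pvContA]
    obtain ⟨hl1, hg1⟩ := List.getElem?_eq_some_iff.mp h1
    have d1 : l.drop (i+1) = a1 :: l.drop (i+2) := by rw [List.drop_eq_getElem_cons hl1, hg1]
    rcases h2 : l[i+2]? with _ | a2
    · have d2 : l.drop (i+2) = [] := by rw [List.drop_eq_nil_iff]; exact List.getElem?_eq_none_iff.1 h2
      simp [d1, d2, pvContA]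
    obtain ⟨hl2, hg2⟩ := List.getElem?_eq_some_iff.mp h2
    have d2 : l.drop (i+2) = a2 :: l.drop (i+3) := by rw [List.drop_eq_getElem_cons hl2, hg2]
    rcases h3 : l[i+3]? with _ | a3
    · have d3 : l.drop (i+3) = [] := by rw [List.drop_eq_nil_iff]; exact List.getElem?_eq_none_iff.1 h3
      simp [d1, d2, d3, pvContA]
    obtain ⟨hl3, hg3⟩ := List.getElem?_eq_some_iff.mp h3
    have d3 : l.drop (i+3) = a3 :: l.drop (i+4) := by rw [List.drop_eq_getElem_cons hl3, hg3]
    simp only [d1, d2, d3, pvContA]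
    rw [pvUpper_eq_digit a1 '4' (by decide) (by decide), pvChar_eq_digit_iff a1 '4' (by decide)]
    have p1 : pvDvW '4' = pvDvW '3' + 1 := by decide
    rw [pvUpper_eq_digit a2 '5' (by decide) (by decide), pvChar_eq_digit_iff a2 '5' (by decide)]
    have p2 : pvDvW '5' = pvDvW '3' + 1 + 1 := by decide
    rw [pvUpper_eq_digit a3 '6' (by decide) (by decide), pvChar_eq_digit_iff a3 '6' (by decide)]
    have p3 : pvDvW '6' = pvDvW '3' + 1 + 1 + 1 := by decide
    rw [p1, p2, p3]
    cases hb1 : pvDigW a1 && (pvDvW a1 == pvDvW '3' + 1) <;> cases hb2 : pvDigW a2 && (pvDvW a2 == pvDvW '3' + 1 + 1) <;> cases hb3 : pvDigW a3 && (pvDvW a3 == pvDvW '3' + 1 + 1 + 1) <;>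
      simp [hb1, hb2, hb3, show PySem.Chars.upperChar '3' = '3' from by decide]
  · have hcv : c = '4' := by rw [pvChar_eq_iff_toNat, hck]; decide
    subst hcv
    simp only [pvAscTry, hgets, e1, e2, e3, PySem.List.pyGet?_natCast]
    have s0 : pvSeq['4'.toNat - 48]? = some '4' := by decide
    have s1 : PySem.List.pyGet? pvSeq ((('4'.toNat - 48 : Nat) : Int) + 1) = some '5' := by decide
    have s2 : PySem.List.pyGet? pvSeq ((('4'.toNat - 48 : Nat) : Int) + 2) = some '6' := by decide
    have s3 : PySem.List.pyGet? pvSeq ((('4'.toNat - 48 : Nat) : Int) + 3) = some '7' := by decide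
    simp only [s0, s1, s2, s3]
    rcases h1 : l[i+1]? with _ | a1
    · have d1 : l.drop (i+1) = [] := by rw [List.drop_eq_nil_iff]; exact List.getElem?_eq_none_iff.1 h1
      simp [d1, pvContA]
    obtain ⟨hl1, hg1⟩ := List.getElem?_eq_some_iff.mp h1
    have d1 : l.drop (i+1) = a1 :: l.drop (i+2) := by rw [List.drop_eq_getElem_cons hl1, hg1]
    rcases h2 : l[i+2]? with _ | a2
    · have d2 : l.drop (i+2) = [] := by rw [List.drop_eq_nil_iff]; exact List.getElem?_eq_none_iff.1 h2
      simp [d1, d2, pvContA]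
    obtain ⟨hl2, hg2⟩ := List.getElem?_eq_some_iff.mp h2
    have d2 : l.drop (i+2) = a2 :: l.drop (i+3) := by rw [List.drop_eq_getElem_cons hl2, hg2]
    rcases h3 : l[i+3]? with _ | a3
    · have d3 : l.drop (i+3) = [] := by rw [List.drop_eq_nil_iff]; exact List.getElem?_eq_none_iff.1 h3
      simp [d1, d2, d3, pvContA]
    obtain ⟨hl3, hg3⟩ := List.getElem?_eq_some_iff.mp h3
    have d3 : l.drop (i+3) = a3 :: l.drop (i+4) := by rw [List.drop_eq_getElem_cons hl3, hg3]
    simp only [d1, d2, d3, pvContA]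
    rw [pvUpper_eq_digit a1 '5' (by decide) (by decide), pvChar_eq_digit_iff a1 '5' (by decide)]
    have p1 : pvDvW '5' = pvDvW '4' + 1 := by decide
    rw [pvUpper_eq_digit a2 '6' (by decide) (by decide), pvChar_eq_digit_iff a2 '6' (by decide)]
    have p2 : pvDvW '6' = pvDvW '4' + 1 + 1 := by decide
    rw [pvUpper_eq_digit a3 '7' (by decide) (by decide), pvChar_eq_digit_iff a3 '7' (by decide)]
    have p3 : pvDvW '7' = pvDvW '4' + 1 + 1 + 1 := by decide
    rw [p1, p2, p3]
    cases hb1 : pvDigW a1 && (pvDvW a1 == pvDvW '4' + 1) <;> cases hb2 : pvDigW a2 && (pvDvW a2 == pvDvW '4' + 1 + 1) <;> cases hb3 : pvDigW a3 && (pvDvW a3 == pvDvW '4' + 1 + 1 + 1) <;>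
      simp [hb1, hb2, hb3, show PySem.Chars.upperChar '4' = '4' from by decide]
  · have hcv : c = '5' := by rw [pvChar_eq_iff_toNat, hck]; decide
    subst hcv
    simp only [pvAscTry, hgets, e1, e2, e3, PySem.List.pyGet?_natCast]
    have s0 : pvSeq['5'.toNat - 48]? = some '5' := by decide
    have s1 : PySem.List.pyGet? pvSeq ((('5'.toNat - 48 : Nat) : Int) + 1) = some '6' := by decide
    have s2 : PySem.List.pyGet? pvSeq ((('5'.toNat - 48 : Nat) : Int) + 2) = some '7' := by decide
    have s3 : PySem.List.pyGet? pvSeq ((('5'.toNat - 48 : Nat) : Int) + 3) = some '8' := by decide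
    simp only [s0, s1, s2, s3]
    rcases h1 : l[i+1]? with _ | a1
    · have d1 : l.drop (i+1) = [] := by rw [List.drop_eq_nil_iff]; exact List.getElem?_eq_none_iff.1 h1
      simp [d1, pvContA]
    obtain ⟨hl1, hg1⟩ := List.getElem?_eq_some_iff.mp h1
    have d1 : l.drop (i+1) = a1 :: l.drop (i+2) := by rw [List.drop_eq_getElem_cons hl1, hg1]
    rcases h2 : l[i+2]? with _ | a2
    · have d2 : l.drop (i+2) = [] := by rw [List.drop_eq_nil_iff]; exact List.getElem?_eq_none_iff.1 h2
      simp [d1, d2, pvContA]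
    obtain ⟨hl2, hg2⟩ := List.getElem?_eq_some_iff.mp h2
    have d2 : l.drop (i+2) = a2 :: l.drop (i+3) := by rw [List.drop_eq_getElem_cons hl2, hg2]
    rcases h3 : l[i+3]? with _ | a3
    · have d3 : l.drop (i+3) = [] := by rw [List.drop_eq_nil_iff]; exact List.getElem?_eq_none_iff.1 h3
      simp [d1, d2, d3, pvContA]
    obtain ⟨hl3, hg3⟩ := List.getElem?_eq_some_iff.mp h3
    have d3 : l.drop (i+3) = a3 :: l.drop (i+4) := by rw [List.drop_eq_getElem_cons hl3, hg3]
    simp only [d1, d2, d3, pvContA]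
    rw [pvUpper_eq_digit a1 '6' (by decide) (by decide), pvChar_eq_digit_iff a1 '6' (by decide)]
    have p1 : pvDvW '6' = pvDvW '5' + 1 := by decide
    rw [pvUpper_eq_digit a2 '7' (by decide) (by decide), pvChar_eq_digit_iff a2 '7' (by decide)]
    have p2 : pvDvW '7' = pvDvW '5' + 1 + 1 := by decide
    rw [pvUpper_eq_digit a3 '8' (by decide) (by decide), pvChar_eq_digit_iff a3 '8' (by decide)]
    have p3 : pvDvW '8' = pvDvW '5' + 1 + 1 + 1 := by decide
    rw [p1, p2, p3]
    cases hb1 : pvDigW a1 && (pvDvW a1 == pvDvW '5' + 1) <;> cases hb2 : pvDigW a2 && (pvDvW a2 == pvDvW '5' + 1 + 1) <;> cases hb3 : pvDigW a3 && (pvDvW a3 == pvDvW '5' + 1 + 1 + 1) <;>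
      simp [hb1, hb2, hb3, show PySem.Chars.upperChar '5' = '5' from by decide]
  · have hcv : c = '6' := by rw [pvChar_eq_iff_toNat, hck]; decide
    subst hcv
    simp only [pvAscTry, hgets, e1, e2, e3, PySem.List.pyGet?_natCast]
    have s0 : pvSeq['6'.toNat - 48]? = some '6' := by decide
    have s1 : PySem.List.pyGet? pvSeq ((('6'.toNat - 48 : Nat) : Int) + 1) = some '7' := by decide
    have s2 : PySem.List.pyGet? pvSeq ((('6'.toNat - 48 : Nat) : Int) + 2) = some '8' := by decide
    have s3 : PySem.List.pyGet? pvSeq ((('6'.toNat - 48 : Nat) : Int) + 3) = some '9' := by decide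
    simp only [s0, s1, s2, s3]
    rcases h1 : l[i+1]? with _ | a1
    · have d1 : l.drop (i+1) = [] := by rw [List.drop_eq_nil_iff]; exact List.getElem?_eq_none_iff.1 h1
      simp [d1, pvContA]
    obtain ⟨hl1, hg1⟩ := List.getElem?_eq_some_iff.mp h1
    have d1 : l.drop (i+1) = a1 :: l.drop (i+2) := by rw [List.drop_eq_getElem_cons hl1, hg1]
    rcases h2 : l[i+2]? with _ | a2
    · have d2 : l.drop (i+2) = [] := by rw [List.drop_eq_nil_iff]; exact List.getElem?_eq_none_iff.1 h2
      simp [d1, d2, pvContA]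
    obtain ⟨hl2, hg2⟩ := List.getElem?_eq_some_iff.mp h2
    have d2 : l.drop (i+2) = a2 :: l.drop (i+3) := by rw [List.drop_eq_getElem_cons hl2, hg2]
    rcases h3 : l[i+3]? with _ | a3
    · have d3 : l.drop (i+3) = [] := by rw [List.drop_eq_nil_iff]; exact List.getElem?_eq_none_iff.1 h3
      simp [d1, d2, d3, pvContA]
    obtain ⟨hl3, hg3⟩ := List.getElem?_eq_some_iff.mp h3
    have d3 : l.drop (i+3) = a3 :: l.drop (i+4) := by rw [List.drop_eq_getElem_cons hl3, hg3]
    simp only [d1, d2, d3, pvContA]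
    rw [pvUpper_eq_digit a1 '7' (by decide) (by decide), pvChar_eq_digit_iff a1 '7' (by decide)]
    have p1 : pvDvW '7' = pvDvW '6' + 1 := by decide
    rw [pvUpper_eq_digit a2 '8' (by decide) (by decide), pvChar_eq_digit_iff a2 '8' (by decide)]
    have p2 : pvDvW '8' = pvDvW '6' + 1 + 1 := by decide
    rw [pvUpper_eq_digit a3 '9' (by decide) (by decide), pvChar_eq_digit_iff a3 '9' (by decide)]
    have p3 : pvDvW '9' = pvDvW '6' + 1 + 1 + 1 := by decide
    rw [p1, p2, p3]
    cases hb1 : pvDigW a1 && (pvDvW a1 == pvDvW '6' + 1) <;> cases hb2 : pvDigW a2 && (pvDvW a2 == pvDvW '6' + 1 + 1) <;> cases hb3 : pvDigW a3 && (pvDvW a3 == pvDvW '6' + 1 + 1 + 1) <;>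
      simp [hb1, hb2, hb3, show PySem.Chars.upperChar '6' = '6' from by decide]
  · have hcv : c = '7' := by rw [pvChar_eq_iff_toNat, hck]; decide
    subst hcv
    simp only [pvAscTry, hgets, e1, e2, e3, PySem.List.pyGet?_natCast]
    have s0 : pvSeq['7'.toNat - 48]? = some '7' := by decide
    have s1 : PySem.List.pyGet? pvSeq ((('7'.toNat - 48 : Nat) : Int) + 1) = some '8' := by decide
    have s2 : PySem.List.pyGet? pvSeq ((('7'.toNat - 48 : Nat) : Int) + 2) = some '9' := by decide
    have s3 : PySem.List.pyGet? pvSeq ((('7'.toNat - 48 : Nat) : Int) + 3) = none := by decide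
    simp only [s0, s1, s2, s3]
    rcases h1 : l[i+1]? with _ | a1
    · have d1 : l.drop (i+1) = [] := by rw [List.drop_eq_nil_iff]; exact List.getElem?_eq_none_iff.1 h1
      simp [d1, pvContA]
    obtain ⟨hl1, hg1⟩ := List.getElem?_eq_some_iff.mp h1
    have d1 : l.drop (i+1) = a1 :: l.drop (i+2) := by rw [List.drop_eq_getElem_cons hl1, hg1]
    rcases h2 : l[i+2]? with _ | a2
    · have d2 : l.drop (i+2) = [] := by rw [List.drop_eq_nil_iff]; exact List.getElem?_eq_none_iff.1 h2
      simp [d1, d2, pvContA]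
    obtain ⟨hl2, hg2⟩ := List.getElem?_eq_some_iff.mp h2
    have d2 : l.drop (i+2) = a2 :: l.drop (i+3) := by rw [List.drop_eq_getElem_cons hl2, hg2]
    rcases h3 : l[i+3]? with _ | a3
    · have d3 : l.drop (i+3) = [] := by rw [List.drop_eq_nil_iff]; exact List.getElem?_eq_none_iff.1 h3
      simp [d1, d2, d3, pvContA]
    obtain ⟨hl3, hg3⟩ := List.getElem?_eq_some_iff.mp h3
    have d3 : l.drop (i+3) = a3 :: l.drop (i+4) := by rw [List.drop_eq_getElem_cons hl3, hg3]
    simp only [d1, d2, d3, pvContA]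
    simp [pvDig_dv_ne a3 (pvDvW '7' + 1 + 1 + 1) (by decide)]
  · have hcv : c = '8' := by rw [pvChar_eq_iff_toNat, hck]; decide
    subst hcv
    simp only [pvAscTry, hgets, e1, e2, e3, PySem.List.pyGet?_natCast]
    have s0 : pvSeq['8'.toNat - 48]? = some '8' := by decide
    have s1 : PySem.List.pyGet? pvSeq ((('8'.toNat - 48 : Nat) : Int) + 1) = some '9' := by decide
    have s2 : PySem.List.pyGet? pvSeq ((('8'.toNat - 48 : Nat) : Int) + 2) = none := by decide
    have s3 : PySem.List.pyGet? pvSeq ((('8'.toNat - 48 : Nat) : Int) + 3) = none := by decide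
    simp only [s0, s1, s2, s3]
    rcases h1 : l[i+1]? with _ | a1
    · have d1 : l.drop (i+1) = [] := by rw [List.drop_eq_nil_iff]; exact List.getElem?_eq_none_iff.1 h1
      simp [d1, pvContA]
    obtain ⟨hl1, hg1⟩ := List.getElem?_eq_some_iff.mp h1
    have d1 : l.drop (i+1) = a1 :: l.drop (i+2) := by rw [List.drop_eq_getElem_cons hl1, hg1]
    rcases h2 : l[i+2]? with _ | a2
    · have d2 : l.drop (i+2) = [] := by rw [List.drop_eq_nil_iff]; exact List.getElem?_eq_none_iff.1 h2
      simp [d1, d2, pvContA]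
    obtain ⟨hl2, hg2⟩ := List.getElem?_eq_some_iff.mp h2
    have d2 : l.drop (i+2) = a2 :: l.drop (i+3) := by rw [List.drop_eq_getElem_cons hl2, hg2]
    rcases h3 : l[i+3]? with _ | a3
    · have d3 : l.drop (i+3) = [] := by rw [List.drop_eq_nil_iff]; exact List.getElem?_eq_none_iff.1 h3
      simp [d1, d2, d3, pvContA]
    obtain ⟨hl3, hg3⟩ := List.getElem?_eq_some_iff.mp h3
    have d3 : l.drop (i+3) = a3 :: l.drop (i+4) := by rw [List.drop_eq_getElem_cons hl3, hg3]
    simp only [d1, d2, d3, pvContA]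
    simp [pvDig_dv_ne a2 (pvDvW '8' + 1 + 1) (by decide)]
  · have hcv : c = '9' := by rw [pvChar_eq_iff_toNat, hck]; decide
    subst hcv
    simp only [pvAscTry, hgets, e1, e2, e3, PySem.List.pyGet?_natCast]
    have s0 : pvSeq['9'.toNat - 48]? = some '9' := by decide
    have s1 : PySem.List.pyGet? pvSeq ((('9'.toNat - 48 : Nat) : Int) + 1) = none := by decide
    have s2 : PySem.List.pyGet? pvSeq ((('9'.toNat - 48 : Nat) : Int) + 2) = none := by decide
    have s3 : PySem.List.pyGet? pvSeq ((('9'.toNat - 48 : Nat) : Int) + 3) = none := by decide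
    simp only [s0, s1, s2, s3]
    rcases h1 : l[i+1]? with _ | a1
    · have d1 : l.drop (i+1) = [] := by rw [List.drop_eq_nil_iff]; exact List.getElem?_eq_none_iff.1 h1
      simp [d1, pvContA]
    obtain ⟨hl1, hg1⟩ := List.getElem?_eq_some_iff.mp h1
    have d1 : l.drop (i+1) = a1 :: l.drop (i+2) := by rw [List.drop_eq_getElem_cons hl1, hg1]
    rcases h2 : l[i+2]? with _ | a2
    · have d2 : l.drop (i+2) = [] := by rw [List.drop_eq_nil_iff]; exact List.getElem?_eq_none_iff.1 h2
      simp [d1, d2, pvContA]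
    obtain ⟨hl2, hg2⟩ := List.getElem?_eq_some_iff.mp h2
    have d2 : l.drop (i+2) = a2 :: l.drop (i+3) := by rw [List.drop_eq_getElem_cons hl2, hg2]
    rcases h3 : l[i+3]? with _ | a3
    · have d3 : l.drop (i+3) = [] := by rw [List.drop_eq_nil_iff]; exact List.getElem?_eq_none_iff.1 h3
      simp [d1, d2, d3, pvContA]
    obtain ⟨hl3, hg3⟩ := List.getElem?_eq_some_iff.mp h3
    have d3 : l.drop (i+3) = a3 :: l.drop (i+4) := by rw [List.drop_eq_getElem_cons hl3, hg3]
    simp only [d1, d2, d3, pvContA]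
    simp [pvDig_dv_ne a1 (pvDvW '9' + 1) (by decide)]

lemma pvDescTry_eq (l : List Char) (i : Nat) (c : Char) (hc : l[i]? = some c) (hd : pvDigW c = true) :
    pvDescTry l (i : Int) ((c.toNat - 48 : Nat) : Int) = pvContD (l.drop (i+1)) (pvDvW c) 3 := by
  have hdig := (pvDigW_iff c).1 hd
  obtain ⟨k, hk, hck⟩ : ∃ k, k ≤ 9 ∧ c.toNat = 48 + k := ⟨c.toNat - 48, by omega, by omega⟩
  have hgets : PySem.List.pyGet? l (i : Int) = some c := by simp [hc]
  have e1 : ((i:Int)+1) = ((i+1:Nat):Int) := by push_cast; ring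
  have e2 : ((i:Int)+2) = ((i+2:Nat):Int) := by push_cast; ring
  have e3 : ((i:Int)+3) = ((i+3:Nat):Int) := by push_cast; ring
  interval_cases k
  · have hcv : c = '0' := by rw [pvChar_eq_iff_toNat, hck]; decide
    subst hcv
    simp only [pvDescTry, hgets, e1, e2, e3, PySem.List.pyGet?_natCast]
    have s0 : pvSeq['0'.toNat - 48]? = some '0' := by decide
    have s1 : PySem.List.pyGet? pvSeq ((('0'.toNat - 48 : Nat) : Int) - 1) = some '9' := by decide
    have s2 : PySem.List.pyGet? pvSeq ((('0'.toNat - 48 : Nat) : Int) - 2) = some '8' := by decide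
    have s3 : PySem.List.pyGet? pvSeq ((('0'.toNat - 48 : Nat) : Int) - 3) = some '7' := by decide
    simp only [s0, s1, s2, s3]
    rcases h1 : l[i+1]? with _ | a1
    · have d1 : l.drop (i+1) = [] := by rw [List.drop_eq_nil_iff]; exact List.getElem?_eq_none_iff.1 h1
      simp [d1, pvContD]
    obtain ⟨hl1, hg1⟩ := List.getElem?_eq_some_iff.mp h1
    have d1 : l.drop (i+1) = a1 :: l.drop (i+2) := by rw [List.drop_eq_getElem_cons hl1, hg1]
    rcases h2 : l[i+2]? with _ | a2
    · have d2 : l.drop (i+2) = [] := by rw [List.drop_eq_nil_iff]; exact List.getElem?_eq_none_iff.1 h2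
      simp [d1, d2, pvContD]
    obtain ⟨hl2, hg2⟩ := List.getElem?_eq_some_iff.mp h2
    have d2 : l.drop (i+2) = a2 :: l.drop (i+3) := by rw [List.drop_eq_getElem_cons hl2, hg2]
    rcases h3 : l[i+3]? with _ | a3
    · have d3 : l.drop (i+3) = [] := by rw [List.drop_eq_nil_iff]; exact List.getElem?_eq_none_iff.1 h3
      simp [d1, d2, d3, pvContD]
    obtain ⟨hl3, hg3⟩ := List.getElem?_eq_some_iff.mp h3
    have d3 : l.drop (i+3) = a3 :: l.drop (i+4) := by rw [List.drop_eq_getElem_cons hl3, hg3]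
    have q1 : PySem.Int.mod (pvDvW '0' - 1) 10 = pvDvW '9' := by decide
    have q2 : PySem.Int.mod (pvDvW '9' - 1) 10 = pvDvW '8' := by decide
    have q3 : PySem.Int.mod (pvDvW '8' - 1) 10 = pvDvW '7' := by decide
    simp only [d1, d2, d3, pvContD, q1, q2, q3]
    rw [pvUpper_eq_digit a1 '9' (by decide) (by decide), pvChar_eq_digit_iff a1 '9' (by decide)]
    rw [pvUpper_eq_digit a2 '8' (by decide) (by decide), pvChar_eq_digit_iff a2 '8' (by decide)]
    rw [pvUpper_eq_digit a3 '7' (by decide) (by decide), pvChar_eq_digit_iff a3 '7' (by decide)]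
    cases hb1 : pvDigW a1 && (pvDvW a1 == pvDvW '9') <;> cases hb2 : pvDigW a2 && (pvDvW a2 == pvDvW '8') <;> cases hb3 : pvDigW a3 && (pvDvW a3 == pvDvW '7') <;>
      simp [hb1, hb2, hb3, show PySem.Chars.upperChar '0' = '0' from by decide]
  · have hcv : c = '1' := by rw [pvChar_eq_iff_toNat, hck]; decide
    subst hcv
    simp only [pvDescTry, hgets, e1, e2, e3, PySem.List.pyGet?_natCast]
    have s0 : pvSeq['1'.toNat - 48]? = some '1' := by decide
    have s1 : PySem.List.pyGet? pvSeq ((('1'.toNat - 48 : Nat) : Int) - 1) = some '0' := by decide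
    have s2 : PySem.List.pyGet? pvSeq ((('1'.toNat - 48 : Nat) : Int) - 2) = some '9' := by decide
    have s3 : PySem.List.pyGet? pvSeq ((('1'.toNat - 48 : Nat) : Int) - 3) = some '8' := by decide
    simp only [s0, s1, s2, s3]
    rcases h1 : l[i+1]? with _ | a1
    · have d1 : l.drop (i+1) = [] := by rw [List.drop_eq_nil_iff]; exact List.getElem?_eq_none_iff.1 h1
      simp [d1, pvContD]
    obtain ⟨hl1, hg1⟩ := List.getElem?_eq_some_iff.mp h1
    have d1 : l.drop (i+1) = a1 :: l.drop (i+2) := by rw [List.drop_eq_getElem_cons hl1, hg1]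
    rcases h2 : l[i+2]? with _ | a2
    · have d2 : l.drop (i+2) = [] := by rw [List.drop_eq_nil_iff]; exact List.getElem?_eq_none_iff.1 h2
      simp [d1, d2, pvContD]
    obtain ⟨hl2, hg2⟩ := List.getElem?_eq_some_iff.mp h2
    have d2 : l.drop (i+2) = a2 :: l.drop (i+3) := by rw [List.drop_eq_getElem_cons hl2, hg2]
    rcases h3 : l[i+3]? with _ | a3
    · have d3 : l.drop (i+3) = [] := by rw [List.drop_eq_nil_iff]; exact List.getElem?_eq_none_iff.1 h3
      simp [d1, d2, d3, pvContD]
    obtain ⟨hl3, hg3⟩ := List.getElem?_eq_some_iff.mp h3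
    have d3 : l.drop (i+3) = a3 :: l.drop (i+4) := by rw [List.drop_eq_getElem_cons hl3, hg3]
    have q1 : PySem.Int.mod (pvDvW '1' - 1) 10 = pvDvW '0' := by decide
    have q2 : PySem.Int.mod (pvDvW '0' - 1) 10 = pvDvW '9' := by decide
    have q3 : PySem.Int.mod (pvDvW '9' - 1) 10 = pvDvW '8' := by decide
    simp only [d1, d2, d3, pvContD, q1, q2, q3]
    rw [pvUpper_eq_digit a1 '0' (by decide) (by decide), pvChar_eq_digit_iff a1 '0' (by decide)]
    rw [pvUpper_eq_digit a2 '9' (by decide) (by decide), pvChar_eq_digit_iff a2 '9' (by decide)]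
    rw [pvUpper_eq_digit a3 '8' (by decide) (by decide), pvChar_eq_digit_iff a3 '8' (by decide)]
    cases hb1 : pvDigW a1 && (pvDvW a1 == pvDvW '0') <;> cases hb2 : pvDigW a2 && (pvDvW a2 == pvDvW '9') <;> cases hb3 : pvDigW a3 && (pvDvW a3 == pvDvW '8') <;>
      simp [hb1, hb2, hb3, show PySem.Chars.upperChar '1' = '1' from by decide]
  · have hcv : c = '2' := by rw [pvChar_eq_iff_toNat, hck]; decide
    subst hcv
    simp only [pvDescTry, hgets, e1, e2, e3, PySem.List.pyGet?_natCast]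
    have s0 : pvSeq['2'.toNat - 48]? = some '2' := by decide
    have s1 : PySem.List.pyGet? pvSeq ((('2'.toNat - 48 : Nat) : Int) - 1) = some '1' := by decide
    have s2 : PySem.List.pyGet? pvSeq ((('2'.toNat - 48 : Nat) : Int) - 2) = some '0' := by decide
    have s3 : PySem.List.pyGet? pvSeq ((('2'.toNat - 48 : Nat) : Int) - 3) = some '9' := by decide
    simp only [s0, s1, s2, s3]
    rcases h1 : l[i+1]? with _ | a1
    · have d1 : l.drop (i+1) = [] := by rw [List.drop_eq_nil_iff]; exact List.getElem?_eq_none_iff.1 h1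
      simp [d1, pvContD]
    obtain ⟨hl1, hg1⟩ := List.getElem?_eq_some_iff.mp h1
    have d1 : l.drop (i+1) = a1 :: l.drop (i+2) := by rw [List.drop_eq_getElem_cons hl1, hg1]
    rcases h2 : l[i+2]? with _ | a2
    · have d2 : l.drop (i+2) = [] := by rw [List.drop_eq_nil_iff]; exact List.getElem?_eq_none_iff.1 h2
      simp [d1, d2, pvContD]
    obtain ⟨hl2, hg2⟩ := List.getElem?_eq_some_iff.mp h2
    have d2 : l.drop (i+2) = a2 :: l.drop (i+3) := by rw [List.drop_eq_getElem_cons hl2, hg2]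
    rcases h3 : l[i+3]? with _ | a3
    · have d3 : l.drop (i+3) = [] := by rw [List.drop_eq_nil_iff]; exact List.getElem?_eq_none_iff.1 h3
      simp [d1, d2, d3, pvContD]
    obtain ⟨hl3, hg3⟩ := List.getElem?_eq_some_iff.mp h3
    have d3 : l.drop (i+3) = a3 :: l.drop (i+4) := by rw [List.drop_eq_getElem_cons hl3, hg3]
    have q1 : PySem.Int.mod (pvDvW '2' - 1) 10 = pvDvW '1' := by decide
    have q2 : PySem.Int.mod (pvDvW '1' - 1) 10 = pvDvW '0' := by decide
    have q3 : PySem.Int.mod (pvDvW '0' - 1) 10 = pvDvW '9' := by decide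
    simp only [d1, d2, d3, pvContD, q1, q2, q3]
    rw [pvUpper_eq_digit a1 '1' (by decide) (by decide), pvChar_eq_digit_iff a1 '1' (by decide)]
    rw [pvUpper_eq_digit a2 '0' (by decide) (by decide), pvChar_eq_digit_iff a2 '0' (by decide)]
    rw [pvUpper_eq_digit a3 '9' (by decide) (by decide), pvChar_eq_digit_iff a3 '9' (by decide)]
    cases hb1 : pvDigW a1 && (pvDvW a1 == pvDvW '1') <;> cases hb2 : pvDigW a2 && (pvDvW a2 == pvDvW '0') <;> cases hb3 : pvDigW a3 && (pvDvW a3 == pvDvW '9') <;>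
      simp [hb1, hb2, hb3, show PySem.Chars.upperChar '2' = '2' from by decide]
  · have hcv : c = '3' := by rw [pvChar_eq_iff_toNat, hck]; decide
    subst hcv
    simp only [pvDescTry, hgets, e1, e2, e3, PySem.List.pyGet?_natCast]
    have s0 : pvSeq['3'.toNat - 48]? = some '3' := by decide
    have s1 : PySem.List.pyGet? pvSeq ((('3'.toNat - 48 : Nat) : Int) - 1) = some '2' := by decide
    have s2 : PySem.List.pyGet? pvSeq ((('3'.toNat - 48 : Nat) : Int) - 2) = some '1' := by decide
    have s3 : PySem.List.pyGet? pvSeq ((('3'.toNat - 48 : Nat) : Int) - 3) = some '0' := by decide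
    simp only [s0, s1, s2, s3]
    rcases h1 : l[i+1]? with _ | a1
    · have d1 : l.drop (i+1) = [] := by rw [List.drop_eq_nil_iff]; exact List.getElem?_eq_none_iff.1 h1
      simp [d1, pvContD]
    obtain ⟨hl1, hg1⟩ := List.getElem?_eq_some_iff.mp h1
    have d1 : l.drop (i+1) = a1 :: l.drop (i+2) := by rw [List.drop_eq_getElem_cons hl1, hg1]
    rcases h2 : l[i+2]? with _ | a2
    · have d2 : l.drop (i+2) = [] := by rw [List.drop_eq_nil_iff]; exact List.getElem?_eq_none_iff.1 h2
      simp [d1, d2, pvContD]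
    obtain ⟨hl2, hg2⟩ := List.getElem?_eq_some_iff.mp h2
    have d2 : l.drop (i+2) = a2 :: l.drop (i+3) := by rw [List.drop_eq_getElem_cons hl2, hg2]
    rcases h3 : l[i+3]? with _ | a3
    · have d3 : l.drop (i+3) = [] := by rw [List.drop_eq_nil_iff]; exact List.getElem?_eq_none_iff.1 h3
      simp [d1, d2, d3, pvContD]
    obtain ⟨hl3, hg3⟩ := List.getElem?_eq_some_iff.mp h3
    have d3 : l.drop (i+3) = a3 :: l.drop (i+4) := by rw [List.drop_eq_getElem_cons hl3, hg3]
    have q1 : PySem.Int.mod (pvDvW '3' - 1) 10 = pvDvW '2' := by decide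
    have q2 : PySem.Int.mod (pvDvW '2' - 1) 10 = pvDvW '1' := by decide
    have q3 : PySem.Int.mod (pvDvW '1' - 1) 10 = pvDvW '0' := by decide
    simp only [d1, d2, d3, pvContD, q1, q2, q3]
    rw [pvUpper_eq_digit a1 '2' (by decide) (by decide), pvChar_eq_digit_iff a1 '2' (by decide)]
    rw [pvUpper_eq_digit a2 '1' (by decide) (by decide), pvChar_eq_digit_iff a2 '1' (by decide)]
    rw [pvUpper_eq_digit a3 '0' (by decide) (by decide), pvChar_eq_digit_iff a3 '0' (by decide)]
    cases hb1 : pvDigW a1 && (pvDvW a1 == pvDvW '2') <;> cases hb2 : pvDigW a2 && (pvDvW a2 == pvDvW '1') <;> cases hb3 : pvDigW a3 && (pvDvW a3 == pvDvW '0') <;>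
      simp [hb1, hb2, hb3, show PySem.Chars.upperChar '3' = '3' from by decide]
  · have hcv : c = '4' := by rw [pvChar_eq_iff_toNat, hck]; decide
    subst hcv
    simp only [pvDescTry, hgets, e1, e2, e3, PySem.List.pyGet?_natCast]
    have s0 : pvSeq['4'.toNat - 48]? = some '4' := by decide
    have s1 : PySem.List.pyGet? pvSeq ((('4'.toNat - 48 : Nat) : Int) - 1) = some '3' := by decide
    have s2 : PySem.List.pyGet? pvSeq ((('4'.toNat - 48 : Nat) : Int) - 2) = some '2' := by decide
    have s3 : PySem.List.pyGet? pvSeq ((('4'.toNat - 48 : Nat) : Int) - 3) = some '1' := by decide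
    simp only [s0, s1, s2, s3]
    rcases h1 : l[i+1]? with _ | a1
    · have d1 : l.drop (i+1) = [] := by rw [List.drop_eq_nil_iff]; exact List.getElem?_eq_none_iff.1 h1
      simp [d1, pvContD]
    obtain ⟨hl1, hg1⟩ := List.getElem?_eq_some_iff.mp h1
    have d1 : l.drop (i+1) = a1 :: l.drop (i+2) := by rw [List.drop_eq_getElem_cons hl1, hg1]
    rcases h2 : l[i+2]? with _ | a2
    · have d2 : l.drop (i+2) = [] := by rw [List.drop_eq_nil_iff]; exact List.getElem?_eq_none_iff.1 h2
      simp [d1, d2, pvContD]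
    obtain ⟨hl2, hg2⟩ := List.getElem?_eq_some_iff.mp h2
    have d2 : l.drop (i+2) = a2 :: l.drop (i+3) := by rw [List.drop_eq_getElem_cons hl2, hg2]
    rcases h3 : l[i+3]? with _ | a3
    · have d3 : l.drop (i+3) = [] := by rw [List.drop_eq_nil_iff]; exact List.getElem?_eq_none_iff.1 h3
      simp [d1, d2, d3, pvContD]
    obtain ⟨hl3, hg3⟩ := List.getElem?_eq_some_iff.mp h3
    have d3 : l.drop (i+3) = a3 :: l.drop (i+4) := by rw [List.drop_eq_getElem_cons hl3, hg3]
    have q1 : PySem.Int.mod (pvDvW '4' - 1) 10 = pvDvW '3' := by decide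
    have q2 : PySem.Int.mod (pvDvW '3' - 1) 10 = pvDvW '2' := by decide
    have q3 : PySem.Int.mod (pvDvW '2' - 1) 10 = pvDvW '1' := by decide
    simp only [d1, d2, d3, pvContD, q1, q2, q3]
    rw [pvUpper_eq_digit a1 '3' (by decide) (by decide), pvChar_eq_digit_iff a1 '3' (by decide)]
    rw [pvUpper_eq_digit a2 '2' (by decide) (by decide), pvChar_eq_digit_iff a2 '2' (by decide)]
    rw [pvUpper_eq_digit a3 '1' (by decide) (by decide), pvChar_eq_digit_iff a3 '1' (by decide)]
    cases hb1 : pvDigW a1 && (pvDvW a1 == pvDvW '3') <;> cases hb2 : pvDigW a2 && (pvDvW a2 == pvDvW '2') <;> cases hb3 : pvDigW a3 && (pvDvW a3 == pvDvW '1') <;>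
      simp [hb1, hb2, hb3, show PySem.Chars.upperChar '4' = '4' from by decide]
  · have hcv : c = '5' := by rw [pvChar_eq_iff_toNat, hck]; decide
    subst hcv
    simp only [pvDescTry, hgets, e1, e2, e3, PySem.List.pyGet?_natCast]
    have s0 : pvSeq['5'.toNat - 48]? = some '5' := by decide
    have s1 : PySem.List.pyGet? pvSeq ((('5'.toNat - 48 : Nat) : Int) - 1) = some '4' := by decide
    have s2 : PySem.List.pyGet? pvSeq ((('5'.toNat - 48 : Nat) : Int) - 2) = some '3' := by decide
    have s3 : PySem.List.pyGet? pvSeq ((('5'.toNat - 48 : Nat) : Int) - 3) = some '2' := by decide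
    simp only [s0, s1, s2, s3]
    rcases h1 : l[i+1]? with _ | a1
    · have d1 : l.drop (i+1) = [] := by rw [List.drop_eq_nil_iff]; exact List.getElem?_eq_none_iff.1 h1
      simp [d1, pvContD]
    obtain ⟨hl1, hg1⟩ := List.getElem?_eq_some_iff.mp h1
    have d1 : l.drop (i+1) = a1 :: l.drop (i+2) := by rw [List.drop_eq_getElem_cons hl1, hg1]
    rcases h2 : l[i+2]? with _ | a2
    · have d2 : l.drop (i+2) = [] := by rw [List.drop_eq_nil_iff]; exact List.getElem?_eq_none_iff.1 h2
      simp [d1, d2, pvContD]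
    obtain ⟨hl2, hg2⟩ := List.getElem?_eq_some_iff.mp h2
    have d2 : l.drop (i+2) = a2 :: l.drop (i+3) := by rw [List.drop_eq_getElem_cons hl2, hg2]
    rcases h3 : l[i+3]? with _ | a3
    · have d3 : l.drop (i+3) = [] := by rw [List.drop_eq_nil_iff]; exact List.getElem?_eq_none_iff.1 h3
      simp [d1, d2, d3, pvContD]
    obtain ⟨hl3, hg3⟩ := List.getElem?_eq_some_iff.mp h3
    have d3 : l.drop (i+3) = a3 :: l.drop (i+4) := by rw [List.drop_eq_getElem_cons hl3, hg3]
    have q1 : PySem.Int.mod (pvDvW '5' - 1) 10 = pvDvW '4' := by decide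
    have q2 : PySem.Int.mod (pvDvW '4' - 1) 10 = pvDvW '3' := by decide
    have q3 : PySem.Int.mod (pvDvW '3' - 1) 10 = pvDvW '2' := by decide
    simp only [d1, d2, d3, pvContD, q1, q2, q3]
    rw [pvUpper_eq_digit a1 '4' (by decide) (by decide), pvChar_eq_digit_iff a1 '4' (by decide)]
    rw [pvUpper_eq_digit a2 '3' (by decide) (by decide), pvChar_eq_digit_iff a2 '3' (by decide)]
    rw [pvUpper_eq_digit a3 '2' (by decide) (by decide), pvChar_eq_digit_iff a3 '2' (by decide)]
    cases hb1 : pvDigW a1 && (pvDvW a1 == pvDvW '4') <;> cases hb2 : pvDigW a2 && (pvDvW a2 == pvDvW '3') <;> cases hb3 : pvDigW a3 && (pvDvW a3 == pvDvW '2') <;>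
      simp [hb1, hb2, hb3, show PySem.Chars.upperChar '5' = '5' from by decide]
  · have hcv : c = '6' := by rw [pvChar_eq_iff_toNat, hck]; decide
    subst hcv
    simp only [pvDescTry, hgets, e1, e2, e3, PySem.List.pyGet?_natCast]
    have s0 : pvSeq['6'.toNat - 48]? = some '6' := by decide
    have s1 : PySem.List.pyGet? pvSeq ((('6'.toNat - 48 : Nat) : Int) - 1) = some '5' := by decide
    have s2 : PySem.List.pyGet? pvSeq ((('6'.toNat - 48 : Nat) : Int) - 2) = some '4' := by decide
    have s3 : PySem.List.pyGet? pvSeq ((('6'.toNat - 48 : Nat) : Int) - 3) = some '3' := by decide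
    simp only [s0, s1, s2, s3]
    rcases h1 : l[i+1]? with _ | a1
    · have d1 : l.drop (i+1) = [] := by rw [List.drop_eq_nil_iff]; exact List.getElem?_eq_none_iff.1 h1
      simp [d1, pvContD]
    obtain ⟨hl1, hg1⟩ := List.getElem?_eq_some_iff.mp h1
    have d1 : l.drop (i+1) = a1 :: l.drop (i+2) := by rw [List.drop_eq_getElem_cons hl1, hg1]
    rcases h2 : l[i+2]? with _ | a2
    · have d2 : l.drop (i+2) = [] := by rw [List.drop_eq_nil_iff]; exact List.getElem?_eq_none_iff.1 h2
      simp [d1, d2, pvContD]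
    obtain ⟨hl2, hg2⟩ := List.getElem?_eq_some_iff.mp h2
    have d2 : l.drop (i+2) = a2 :: l.drop (i+3) := by rw [List.drop_eq_getElem_cons hl2, hg2]
    rcases h3 : l[i+3]? with _ | a3
    · have d3 : l.drop (i+3) = [] := by rw [List.drop_eq_nil_iff]; exact List.getElem?_eq_none_iff.1 h3
      simp [d1, d2, d3, pvContD]
    obtain ⟨hl3, hg3⟩ := List.getElem?_eq_some_iff.mp h3
    have d3 : l.drop (i+3) = a3 :: l.drop (i+4) := by rw [List.drop_eq_getElem_cons hl3, hg3]
    have q1 : PySem.Int.mod (pvDvW '6' - 1) 10 = pvDvW '5' := by decide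
    have q2 : PySem.Int.mod (pvDvW '5' - 1) 10 = pvDvW '4' := by decide
    have q3 : PySem.Int.mod (pvDvW '4' - 1) 10 = pvDvW '3' := by decide
    simp only [d1, d2, d3, pvContD, q1, q2, q3]
    rw [pvUpper_eq_digit a1 '5' (by decide) (by decide), pvChar_eq_digit_iff a1 '5' (by decide)]
    rw [pvUpper_eq_digit a2 '4' (by decide) (by decide), pvChar_eq_digit_iff a2 '4' (by decide)]
    rw [pvUpper_eq_digit a3 '3' (by decide) (by decide), pvChar_eq_digit_iff a3 '3' (by decide)]
    cases hb1 : pvDigW a1 && (pvDvW a1 == pvDvW '5') <;> cases hb2 : pvDigW a2 && (pvDvW a2 == pvDvW '4') <;> cases hb3 : pvDigW a3 && (pvDvW a3 == pvDvW '3') <;>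
      simp [hb1, hb2, hb3, show PySem.Chars.upperChar '6' = '6' from by decide]
  · have hcv : c = '7' := by rw [pvChar_eq_iff_toNat, hck]; decide
    subst hcv
    simp only [pvDescTry, hgets, e1, e2, e3, PySem.List.pyGet?_natCast]
    have s0 : pvSeq['7'.toNat - 48]? = some '7' := by decide
    have s1 : PySem.List.pyGet? pvSeq ((('7'.toNat - 48 : Nat) : Int) - 1) = some '6' := by decide
    have s2 : PySem.List.pyGet? pvSeq ((('7'.toNat - 48 : Nat) : Int) - 2) = some '5' := by decide
    have s3 : PySem.List.pyGet? pvSeq ((('7'.toNat - 48 : Nat) : Int) - 3) = some '4' := by decide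
    simp only [s0, s1, s2, s3]
    rcases h1 : l[i+1]? with _ | a1
    · have d1 : l.drop (i+1) = [] := by rw [List.drop_eq_nil_iff]; exact List.getElem?_eq_none_iff.1 h1
      simp [d1, pvContD]
    obtain ⟨hl1, hg1⟩ := List.getElem?_eq_some_iff.mp h1
    have d1 : l.drop (i+1) = a1 :: l.drop (i+2) := by rw [List.drop_eq_getElem_cons hl1, hg1]
    rcases h2 : l[i+2]? with _ | a2
    · have d2 : l.drop (i+2) = [] := by rw [List.drop_eq_nil_iff]; exact List.getElem?_eq_none_iff.1 h2
      simp [d1, d2, pvContD]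
    obtain ⟨hl2, hg2⟩ := List.getElem?_eq_some_iff.mp h2
    have d2 : l.drop (i+2) = a2 :: l.drop (i+3) := by rw [List.drop_eq_getElem_cons hl2, hg2]
    rcases h3 : l[i+3]? with _ | a3
    · have d3 : l.drop (i+3) = [] := by rw [List.drop_eq_nil_iff]; exact List.getElem?_eq_none_iff.1 h3
      simp [d1, d2, d3, pvContD]
    obtain ⟨hl3, hg3⟩ := List.getElem?_eq_some_iff.mp h3
    have d3 : l.drop (i+3) = a3 :: l.drop (i+4) := by rw [List.drop_eq_getElem_cons hl3, hg3]
    have q1 : PySem.Int.mod (pvDvW '7' - 1) 10 = pvDvW '6' := by decide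
    have q2 : PySem.Int.mod (pvDvW '6' - 1) 10 = pvDvW '5' := by decide
    have q3 : PySem.Int.mod (pvDvW '5' - 1) 10 = pvDvW '4' := by decide
    simp only [d1, d2, d3, pvContD, q1, q2, q3]
    rw [pvUpper_eq_digit a1 '6' (by decide) (by decide), pvChar_eq_digit_iff a1 '6' (by decide)]
    rw [pvUpper_eq_digit a2 '5' (by decide) (by decide), pvChar_eq_digit_iff a2 '5' (by decide)]
    rw [pvUpper_eq_digit a3 '4' (by decide) (by decide), pvChar_eq_digit_iff a3 '4' (by decide)]
    cases hb1 : pvDigW a1 && (pvDvW a1 == pvDvW '6') <;> cases hb2 : pvDigW a2 && (pvDvW a2 == pvDvW '5') <;> cases hb3 : pvDigW a3 && (pvDvW a3 == pvDvW '4') <;>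
      simp [hb1, hb2, hb3, show PySem.Chars.upperChar '7' = '7' from by decide]
  · have hcv : c = '8' := by rw [pvChar_eq_iff_toNat, hck]; decide
    subst hcv
    simp only [pvDescTry, hgets, e1, e2, e3, PySem.List.pyGet?_natCast]
    have s0 : pvSeq['8'.toNat - 48]? = some '8' := by decide
    have s1 : PySem.List.pyGet? pvSeq ((('8'.toNat - 48 : Nat) : Int) - 1) = some '7' := by decide
    have s2 : PySem.List.pyGet? pvSeq ((('8'.toNat - 48 : Nat) : Int) - 2) = some '6' := by decide
    have s3 : PySem.List.pyGet? pvSeq ((('8'.toNat - 48 : Nat) : Int) - 3) = some '5' := by decide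
    simp only [s0, s1, s2, s3]
    rcases h1 : l[i+1]? with _ | a1
    · have d1 : l.drop (i+1) = [] := by rw [List.drop_eq_nil_iff]; exact List.getElem?_eq_none_iff.1 h1
      simp [d1, pvContD]
    obtain ⟨hl1, hg1⟩ := List.getElem?_eq_some_iff.mp h1
    have d1 : l.drop (i+1) = a1 :: l.drop (i+2) := by rw [List.drop_eq_getElem_cons hl1, hg1]
    rcases h2 : l[i+2]? with _ | a2
    · have d2 : l.drop (i+2) = [] := by rw [List.drop_eq_nil_iff]; exact List.getElem?_eq_none_iff.1 h2
      simp [d1, d2, pvContD]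
    obtain ⟨hl2, hg2⟩ := List.getElem?_eq_some_iff.mp h2
    have d2 : l.drop (i+2) = a2 :: l.drop (i+3) := by rw [List.drop_eq_getElem_cons hl2, hg2]
    rcases h3 : l[i+3]? with _ | a3
    · have d3 : l.drop (i+3) = [] := by rw [List.drop_eq_nil_iff]; exact List.getElem?_eq_none_iff.1 h3
      simp [d1, d2, d3, pvContD]
    obtain ⟨hl3, hg3⟩ := List.getElem?_eq_some_iff.mp h3
    have d3 : l.drop (i+3) = a3 :: l.drop (i+4) := by rw [List.drop_eq_getElem_cons hl3, hg3]
    have q1 : PySem.Int.mod (pvDvW '8' - 1) 10 = pvDvW '7' := by decide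
    have q2 : PySem.Int.mod (pvDvW '7' - 1) 10 = pvDvW '6' := by decide
    have q3 : PySem.Int.mod (pvDvW '6' - 1) 10 = pvDvW '5' := by decide
    simp only [d1, d2, d3, pvContD, q1, q2, q3]
    rw [pvUpper_eq_digit a1 '7' (by decide) (by decide), pvChar_eq_digit_iff a1 '7' (by decide)]
    rw [pvUpper_eq_digit a2 '6' (by decide) (by decide), pvChar_eq_digit_iff a2 '6' (by decide)]
    rw [pvUpper_eq_digit a3 '5' (by decide) (by decide), pvChar_eq_digit_iff a3 '5' (by decide)]
    cases hb1 : pvDigW a1 && (pvDvW a1 == pvDvW '7') <;> cases hb2 : pvDigW a2 && (pvDvW a2 == pvDvW '6') <;> cases hb3 : pvDigW a3 && (pvDvW a3 == pvDvW '5') <;>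
      simp [hb1, hb2, hb3, show PySem.Chars.upperChar '8' = '8' from by decide]
  · have hcv : c = '9' := by rw [pvChar_eq_iff_toNat, hck]; decide
    subst hcv
    simp only [pvDescTry, hgets, e1, e2, e3, PySem.List.pyGet?_natCast]
    have s0 : pvSeq['9'.toNat - 48]? = some '9' := by decide
    have s1 : PySem.List.pyGet? pvSeq ((('9'.toNat - 48 : Nat) : Int) - 1) = some '8' := by decide
    have s2 : PySem.List.pyGet? pvSeq ((('9'.toNat - 48 : Nat) : Int) - 2) = some '7' := by decide
    have s3 : PySem.List.pyGet? pvSeq ((('9'.toNat - 48 : Nat) : Int) - 3) = some '6' := by decide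
    simp only [s0, s1, s2, s3]
    rcases h1 : l[i+1]? with _ | a1
    · have d1 : l.drop (i+1) = [] := by rw [List.drop_eq_nil_iff]; exact List.getElem?_eq_none_iff.1 h1
      simp [d1, pvContD]
    obtain ⟨hl1, hg1⟩ := List.getElem?_eq_some_iff.mp h1
    have d1 : l.drop (i+1) = a1 :: l.drop (i+2) := by rw [List.drop_eq_getElem_cons hl1, hg1]
    rcases h2 : l[i+2]? with _ | a2
    · have d2 : l.drop (i+2) = [] := by rw [List.drop_eq_nil_iff]; exact List.getElem?_eq_none_iff.1 h2
      simp [d1, d2, pvContD]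
    obtain ⟨hl2, hg2⟩ := List.getElem?_eq_some_iff.mp h2
    have d2 : l.drop (i+2) = a2 :: l.drop (i+3) := by rw [List.drop_eq_getElem_cons hl2, hg2]
    rcases h3 : l[i+3]? with _ | a3
    · have d3 : l.drop (i+3) = [] := by rw [List.drop_eq_nil_iff]; exact List.getElem?_eq_none_iff.1 h3
      simp [d1, d2, d3, pvContD]
    obtain ⟨hl3, hg3⟩ := List.getElem?_eq_some_iff.mp h3
    have d3 : l.drop (i+3) = a3 :: l.drop (i+4) := by rw [List.drop_eq_getElem_cons hl3, hg3]
    have q1 : PySem.Int.mod (pvDvW '9' - 1) 10 = pvDvW '8' := by decide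
    have q2 : PySem.Int.mod (pvDvW '8' - 1) 10 = pvDvW '7' := by decide
    have q3 : PySem.Int.mod (pvDvW '7' - 1) 10 = pvDvW '6' := by decide
    simp only [d1, d2, d3, pvContD, q1, q2, q3]
    rw [pvUpper_eq_digit a1 '8' (by decide) (by decide), pvChar_eq_digit_iff a1 '8' (by decide)]
    rw [pvUpper_eq_digit a2 '7' (by decide) (by decide), pvChar_eq_digit_iff a2 '7' (by decide)]
    rw [pvUpper_eq_digit a3 '6' (by decide) (by decide), pvChar_eq_digit_iff a3 '6' (by decide)]
    cases hb1 : pvDigW a1 && (pvDvW a1 == pvDvW '8') <;> cases hb2 : pvDigW a2 && (pvDvW a2 == pvDvW '7') <;> cases hb3 : pvDigW a3 && (pvDvW a3 == pvDvW '6') <;>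
      simp [hb1, hb2, hb3, show PySem.Chars.upperChar '9' = '9' from by decide]

lemma pvAGo_eq_aux : ∀ (n : Nat) (l : List Char) (i : Nat), l.length - i = n →
    pvAGo l (PySem.List.pyRange (i : Int) (l.length : Int) 1) = pvAnyWin (l.drop i) := by
  intro n
  induction n with
  | zero =>
    intro l i h
    rw [PySem.List.pyRange_one_eq_nil (by omega), List.drop_eq_nil_iff.2 (by omega)]
    rfl
  | succ n ih =>
    intro l i h
    have hlt : i < l.length := by omega
    rw [PySem.List.pyRange_one_cons (by exact_mod_cast hlt)]
    have e1 : ((i:Int)+1) = ((i+1:Nat):Int) := by push_cast; ring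
    have hget : l[i]? = some l[i] := List.getElem?_eq_some_iff.2 ⟨hlt, rfl⟩
    have hdrop : l.drop i = l[i] :: l.drop (i+1) := List.drop_eq_getElem_cons hlt
    have ihh := ih l (i+1) (by omega)
    simp only [pvAGo, PySem.List.pyGet?_natCast, hget, e1, ihh, hdrop, pvAnyWin]
    cases hd : pvDigW l[i] with
    | false =>
      rw [pvIndex?_seq, if_neg (by simp [hd])]
      simp
    | true =>
      rw [pvIndex?_seq, if_pos (by simp [hd])]
      simp only []
      rw [pvAscTry_eq l i l[i] hget hd, pvDescTry_eq l i l[i] hget hd]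
      cases pvContA (l.drop (i+1)) (pvDvW l[i]) 3 <;>
        cases pvContD (l.drop (i+1)) (pvDvW l[i]) 3 <;> simp

lemma pvA_eq_anyWin (l : List Char) : pvAGo l (PySem.List.pyRange 0 (l.length : Int) 1) = pvAnyWin l := by
  have := pvAGo_eq_aux l.length l 0 (by omega)
  simpa using this

lemma pvAnyWin_split : ∀ l : List Char, pvAnyWin l = (pvHasA l || pvHasD l) := by
  intro l
  induction l with
  | nil => rfl
  | cons c rest ih =>
    simp only [pvAnyWin, pvHasA, pvHasD, ih]
    cases pvDigW c && pvContA rest (pvDvW c) 3 <;>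
      cases pvDigW c && pvContD rest (pvDvW c) 3 <;>
      cases pvHasA rest <;> cases pvHasD rest <;> rfl

-- B-side: the run-length counters find an asc / no-wrap-desc window exactly when one exists

lemma pvDv_eq_w (c : Char) : pvDv c = pvDvW c := by
  unfold pvDv pvDvW
  rw [Int.subNatNat_eq_coe]; norm_num

lemma pvDigB_eq (c : Char) : pvDigB c = pvDigW c := by
  by_cases h : 48 ≤ c.toNat ∧ c.toNat ≤ 57
  · rw [(pvDigW_iff c).2 h]
    unfold pvDigB
    rw [decide_eq_true_iff]
    rw [Char.le_def, Char.le_def, UInt32.le_iff_toNat_le, UInt32.le_iff_toNat_le]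
    exact ⟨h.1, h.2⟩
  · have hd : pvDigW c = false := by
      cases hx : pvDigW c
      · rfl
      · exact absurd ((pvDigW_iff c).1 hx) h
    rw [hd]
    unfold pvDigB
    rw [decide_eq_false_iff_not]
    intro hle
    rw [Char.le_def, Char.le_def, UInt32.le_iff_toNat_le, UInt32.le_iff_toNat_le] at hle
    exact h ⟨hle.1, hle.2⟩

lemma pvContA_mono (m m' : Nat) (l : List Char) (p : Int) (hle : m' ≤ m)
    (h : pvContA l p m = true) : pvContA l p m' = true := by
  induction m generalizing m' l p with
  | zero => interval_cases m'; cases l <;> rfl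
  | succ m ih =>
    cases m' with
    | zero => cases l <;> rfl
    | succ m' =>
      cases l with
      | nil => exact absurd h (by simp [pvContA])
      | cons c rest =>
        simp only [pvContA, Bool.and_eq_true] at h ⊢
        exact ⟨h.1, ih m' rest (p+1) (by omega) h.2⟩

lemma pvContDn_mono (m m' : Nat) (l : List Char) (p : Int) (hle : m' ≤ m)
    (h : pvContDn l p m = true) : pvContDn l p m' = true := by
  induction m generalizing m' l p with
  | zero => interval_cases m'; cases l <;> rfl
  | succ m ih =>
    cases m' with
    | zero => cases l <;> rfl
    | succ m' =>
      cases l with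
      | nil => exact absurd h (by simp [pvContDn])
      | cons c rest =>
        simp only [pvContDn, Bool.and_eq_true] at h ⊢
        exact ⟨h.1, ih m' rest _ (by omega) h.2⟩

lemma pvDvW_bounds (c : Char) (h : pvDigW c = true) : 0 ≤ pvDvW c ∧ pvDvW c ≤ 9 := by
  have := (pvDigW_iff c).1 h
  unfold pvDvW
  rw [Int.subNatNat_eq_coe]; norm_num
  omega

lemma pvContA_zero (l : List Char) (p : Int) : pvContA l p 0 = true := by cases l <;> rfl
lemma pvContDn_zero (l : List Char) (p : Int) : pvContDn l p 0 = true := by cases l <;> rfl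

lemma pvB_main : ∀ (l : List Char),
    (pvBGo l 0 0 none = (pvHasA l || pvHasDn l)) ∧
    (∀ (p : Int) (a d : Nat), 1 ≤ a → a ≤ 3 → 1 ≤ d → d ≤ 3 → 0 ≤ p → p ≤ 9 →
      pvBGo l (a : Int) (d : Int) (some p) =
        (pvContA l p (4 - a) || pvContDn l p (4 - d) || pvHasA l || pvHasDn l)) := by
  intro l
  induction l with
  | nil =>
    refine ⟨rfl, ?_⟩
    intro p a d h1 h2 h3 h4 h5 h6
    obtain ⟨ma, hma⟩ : ∃ m, 4 - a = m + 1 := ⟨3 - a, by omega⟩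
    obtain ⟨md, hmd⟩ : ∃ m, 4 - d = m + 1 := ⟨3 - d, by omega⟩
    rw [hma, hmd]
    rfl
  | cons c rest ih =>
    constructor
    · -- state (0, 0, None): a fresh scan
      cases hd : pvDigW c with
      | false =>
        simp only [pvBGo, pvDigB_eq, pvDv_eq_w, hd]
        rw [ih.1]
        simp [pvHasA, pvHasDn, hd]
      | true =>
        have hb := pvDvW_bounds c hd
        have key := ih.2 (pvDvW c) 1 1 (by omega) (by omega) (by omega) (by omega) hb.1 hb.2
        norm_num at key
        simp only [pvBGo, pvDigB_eq, pvDv_eq_w, hd]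
        rw [if_pos trivial,
          show (((1:Int) == 4) || ((1:Int) == 4)) = false from by decide,
          if_neg (by simp), key]
        simp only [pvHasA, pvHasDn, hd, Bool.true_and]
        cases pvContA rest (pvDvW c) 3 <;> cases pvContDn rest (pvDvW c) 3 <;>
          cases pvHasA rest <;> cases pvHasDn rest <;> rfl
    · -- state (a, d, some p): runs of length a and d end just before c
      intro p a d h1 h2 h3 h4 h5 h6
      obtain ⟨ma, hma⟩ : ∃ m, 4 - a = m + 1 := ⟨3 - a, by omega⟩
      obtain ⟨md, hmd⟩ : ∃ m, 4 - d = m + 1 := ⟨3 - d, by omega⟩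
      cases hd : pvDigW c with
      | false =>
        simp only [pvBGo, pvDigB_eq, pvDv_eq_w, hd]
        rw [ih.1, hma, hmd]
        simp [pvContA, pvContDn, pvHasA, pvHasDn, hd]
      | true =>
        have hb := pvDvW_bounds c hd
        simp only [pvBGo, pvDigB_eq, pvDv_eq_w, hd]
        rw [if_pos trivial]
        by_cases hA : pvDvW c = p + 1 <;> by_cases hD : pvDvW c = p - 1
        · exfalso; omega
        · -- ascending run continues, descending run restarts
          have hAb : (pvDvW c == p + 1) = true := beq_iff_eq.2 hA
          have hDb : (pvDvW c == p - 1) = false := beq_eq_false_iff_ne.2 hD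
          simp only [hAb, hDb, Bool.false_eq_true, if_true, if_false]
          by_cases ha3 : a = 3
          · subst ha3
            rw [show ((((3:Nat):Int) + 1 == 4) || ((1:Int) == 4)) = true from by decide,
              if_pos rfl]
            have : ma = 0 := by omega
            rw [hma, this]
            simp [pvContA, hd, hAb, pvContA_zero]
          · have key := ih.2 (pvDvW c) (a+1) 1 (by omega) (by omega) (by omega) (by omega) hb.1 hb.2
            have hcond : (((a:Int) + 1 == 4) || ((1:Int) == 4)) = false := by
              have : ¬ ((a:Int) + 1 = 4) := by omega
              simp [this]
            rw [hcond, if_neg (by simp)]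
            push_cast at key
            rw [key, hma, hmd]
            simp only [pvContA, pvContDn, pvHasA, pvHasDn, hd, hAb, hDb, Bool.true_and,
              Bool.false_and, Bool.and_false, Bool.false_or, Bool.or_false]
            rw [← hA]
            have hmaeq : ma = 3 - a := by omega
            rw [hmaeq]
            cases h3' : pvContA rest (pvDvW c) 3 with
            | true =>
              have := pvContA_mono 3 (3 - a) rest (pvDvW c) (by omega) h3'
              simp [this]
            | false =>
              cases pvContA rest (pvDvW c) (3 - a) <;>
                cases pvContDn rest (pvDvW c) 3 <;> cases pvHasA rest <;> cases pvHasDn rest <;> simp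
        · -- descending run continues, ascending run restarts
          have hAb : (pvDvW c == p + 1) = false := beq_eq_false_iff_ne.2 hA
          have hDb : (pvDvW c == p - 1) = true := beq_iff_eq.2 hD
          simp only [hAb, hDb, Bool.false_eq_true, if_true, if_false]
          by_cases hd3 : d = 3
          · subst hd3
            rw [show (((1:Int) == 4) || (((3:Nat):Int) + 1 == 4)) = true from by decide,
              if_pos rfl]
            have : md = 0 := by omega
            rw [hmd, this]
            simp [pvContDn, hd, hDb, pvContDn_zero]
          · have key := ih.2 (pvDvW c) 1 (d+1) (by omega) (by omega) (by omega) (by omega) hb.1 hb.2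
            have hcond : (((1:Int) == 4) || ((d:Int) + 1 == 4)) = false := by
              have : ¬ ((d:Int) + 1 = 4) := by omega
              simp [this]
            rw [hcond, if_neg (by simp)]
            push_cast at key
            rw [key, hma, hmd]
            simp only [pvContA, pvContDn, pvHasA, pvHasDn, hd, hAb, hDb, Bool.true_and,
              Bool.false_and, Bool.and_false, Bool.false_or, Bool.or_false]
            rw [← hD]
            have hmdeq : md = 3 - d := by omega
            rw [hmdeq]
            cases h3' : pvContDn rest (pvDvW c) 3 with
            | true =>
              have := pvContDn_mono 3 (3 - d) rest (pvDvW c) (by omega) h3'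
              simp [this]
            | false =>
              cases pvContA rest (pvDvW c) 3 <;>
                cases pvContDn rest (pvDvW c) (3 - d) <;> cases pvHasA rest <;> cases pvHasDn rest <;> simp
        · -- both runs restart at c
          have hAb : (pvDvW c == p + 1) = false := beq_eq_false_iff_ne.2 hA
          have hDb : (pvDvW c == p - 1) = false := beq_eq_false_iff_ne.2 hD
          simp only [hAb, hDb, Bool.false_eq_true, if_false]
          rw [show (((1:Int) == 4) || ((1:Int) == 4)) = false from by decide,
            if_neg (by simp)]
          have key := ih.2 (pvDvW c) 1 1 (by omega) (by omega) (by omega) (by omega) hb.1 hb.2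
          norm_num at key
          rw [key, hma, hmd]
          simp only [pvContA, pvContDn, pvHasA, pvHasDn, hd, hAb, hDb, Bool.true_and,
            Bool.false_and, Bool.and_false, Bool.false_or, Bool.or_false]
          cases pvContA rest (pvDvW c) 3 <;> cases pvContDn rest (pvDvW c) 3 <;>
            cases pvHasA rest <;> cases pvHasDn rest <;> rfl

lemma pvB_repr (t : String) : number_sequence_alt t = (pvHasA t.toList || pvHasDn t.toList) := by
  unfold number_sequence_alt
  exact (pvB_main t.toList).1

lemma pvA_repr (t : String) : number_sequence t = (pvHasA t.toList || pvHasD t.toList) := by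
  unfold number_sequence
  rw [pvA_eq_anyWin, pvAnyWin_split]

-- a no-wrap descending window is in particular a (mod 10) descending window
lemma pvContDn_imp_contD : ∀ (m : Nat) (l : List Char) (p : Int), 0 ≤ p → p ≤ 9 →
    pvContDn l p m = true → pvContD l p m = true := by
  intro m
  induction m with
  | zero => intro l p _ _ _; cases l <;> rfl
  | succ m ih =>
    intro l p hp0 hp9 h
    cases l with
    | nil => exact absurd h (by simp [pvContDn])
    | cons c rest =>
      simp only [pvContDn, Bool.and_eq_true, beq_iff_eq] at h
      obtain ⟨⟨hdc, hval⟩, hrest⟩ := h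
      have hb := pvDvW_bounds c hdc
      have hp1 : 0 ≤ p - 1 := by omega
      have hmod : PySem.Int.mod (p - 1) 10 = p - 1 := by
        rw [PySem.Int.mod_eq_emod_of_pos (by norm_num)]
        omega
      simp only [pvContD, Bool.and_eq_true, beq_iff_eq, hmod]
      exact ⟨⟨hdc, hval⟩, ih rest (p - 1) hp1 (by omega) hrest⟩

lemma pvHasDn_imp_hasD : ∀ (l : List Char), pvHasDn l = true → pvHasD l = true := by
  intro l
  induction l with
  | nil => intro h; exact h
  | cons c rest ih =>
    intro h
    simp only [pvHasDn, Bool.or_eq_true, Bool.and_eq_true] at h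
    simp only [pvHasD, Bool.or_eq_true, Bool.and_eq_true]
    rcases h with ⟨hdc, hcont⟩ | h
    · have hb := pvDvW_bounds c hdc
      exact Or.inl ⟨hdc, pvContDn_imp_contD 3 rest (pvDvW c) hb.1 hb.2 hcont⟩
    · exact Or.inr (ih h)

-- bridge: the Boolean scans coincide with D_'s literal-window infix conditions

def pvAscWin (v : Nat) : List Char := (List.range 4).map fun k => Char.ofNat (48 + v + k)
def pvW (v k : Nat) : Char := Char.ofNat (48 + (v + 10 - k) % 10)
def pvDescWin (v : Nat) : List Char := (List.range 4).map (pvW v)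

lemma pvWrap3_iff (t : String) :
    (∃ w ∈ (["0987", "1098", "2109"] : List String), PySem.Str.isIn w t = true) ↔
      ∃ v < 3, (pvDescWin v).IsInfix t.toList := by
  have e0 : ("0987" : String).toList = pvDescWin 0 := by decide
  have e1 : ("1098" : String).toList = pvDescWin 1 := by decide
  have e2 : ("2109" : String).toList = pvDescWin 2 := by decide
  constructor
  · rintro ⟨w, hw, h⟩
    rw [PySem.Str.isIn_iff_infix] at h
    simp only [List.mem_cons, List.not_mem_nil, or_false] at hw
    rcases hw with hw | hw | hw <;> subst hw
    · exact ⟨0, by omega, e0 ▸ h⟩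
    · exact ⟨1, by omega, e1 ▸ h⟩
    · exact ⟨2, by omega, e2 ▸ h⟩
  · rintro ⟨v, hv, h⟩
    interval_cases v
    · exact ⟨"0987", by simp, (PySem.Str.isIn_iff_infix _ _).2 (e0 ▸ h)⟩
    · exact ⟨"1098", by simp, (PySem.Str.isIn_iff_infix _ _).2 (e1 ▸ h)⟩
    · exact ⟨"2109", by simp, (PySem.Str.isIn_iff_infix _ _).2 (e2 ▸ h)⟩

lemma pvPlain14_iff (t : String) :
    (∀ w ∈ (["0123", "1234", "2345", "3456", "4567", "5678", "6789",
             "3210", "4321", "5432", "6543", "7654", "8765", "9876"] : List String),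
        PySem.Str.isIn w t = false) ↔
      ((∀ v < 7, ¬ (pvAscWin v).IsInfix t.toList) ∧
       (∀ v < 7, ¬ ((pvAscWin v).reverse).IsInfix t.toList)) := by
  have ea0 : ("0123" : String).toList = pvAscWin 0 := by decide
  have ea1 : ("1234" : String).toList = pvAscWin 1 := by decide
  have ea2 : ("2345" : String).toList = pvAscWin 2 := by decide
  have ea3 : ("3456" : String).toList = pvAscWin 3 := by decide
  have ea4 : ("4567" : String).toList = pvAscWin 4 := by decide
  have ea5 : ("5678" : String).toList = pvAscWin 5 := by decide
  have ea6 : ("6789" : String).toList = pvAscWin 6 := by decide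
  have er0 : ("3210" : String).toList = (pvAscWin 0).reverse := by decide
  have er1 : ("4321" : String).toList = (pvAscWin 1).reverse := by decide
  have er2 : ("5432" : String).toList = (pvAscWin 2).reverse := by decide
  have er3 : ("6543" : String).toList = (pvAscWin 3).reverse := by decide
  have er4 : ("7654" : String).toList = (pvAscWin 4).reverse := by decide
  have er5 : ("8765" : String).toList = (pvAscWin 5).reverse := by decide
  have er6 : ("9876" : String).toList = (pvAscWin 6).reverse := by decide
  have hb : ∀ w : String, PySem.Str.isIn w t = false ↔ ¬ List.IsInfix w.toList t.toList := by
    intro w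
    rw [← PySem.Str.isIn_iff_infix, Bool.eq_false_iff]
  constructor
  · intro h
    constructor
    · intro v hv
      interval_cases v
      · exact ea0 ▸ ((hb _).1 (h _ (by simp)))
      · exact ea1 ▸ ((hb _).1 (h _ (by simp)))
      · exact ea2 ▸ ((hb _).1 (h _ (by simp)))
      · exact ea3 ▸ ((hb _).1 (h _ (by simp)))
      · exact ea4 ▸ ((hb _).1 (h _ (by simp)))
      · exact ea5 ▸ ((hb _).1 (h _ (by simp)))
      · exact ea6 ▸ ((hb _).1 (h _ (by simp)))
    · intro v hv
      interval_cases v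
      · exact er0 ▸ ((hb _).1 (h _ (by simp)))
      · exact er1 ▸ ((hb _).1 (h _ (by simp)))
      · exact er2 ▸ ((hb _).1 (h _ (by simp)))
      · exact er3 ▸ ((hb _).1 (h _ (by simp)))
      · exact er4 ▸ ((hb _).1 (h _ (by simp)))
      · exact er5 ▸ ((hb _).1 (h _ (by simp)))
      · exact er6 ▸ ((hb _).1 (h _ (by simp)))
  · rintro ⟨hA, hR⟩ w hw
    simp only [List.mem_cons, List.not_mem_nil, or_false] at hw
    rcases hw with hw | hw | hw | hw | hw | hw | hw | hw | hw | hw | hw | hw | hw | hw <;> subst hw <;>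
      rw [hb]
    · exact ea0 ▸ hA 0 (by omega)
    · exact ea1 ▸ hA 1 (by omega)
    · exact ea2 ▸ hA 2 (by omega)
    · exact ea3 ▸ hA 3 (by omega)
    · exact ea4 ▸ hA 4 (by omega)
    · exact ea5 ▸ hA 5 (by omega)
    · exact ea6 ▸ hA 6 (by omega)
    · exact er0 ▸ hR 0 (by omega)
    · exact er1 ▸ hR 1 (by omega)
    · exact er2 ▸ hR 2 (by omega)
    · exact er3 ▸ hR 3 (by omega)
    · exact er4 ▸ hR 4 (by omega)
    · exact er5 ▸ hR 5 (by omega)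
    · exact er6 ▸ hR 6 (by omega)

lemma pvToNat_ofNat (m : Nat) (h : m ≤ 127) : (Char.ofNat m).toNat = m := by
  have hv : m.isValidChar := Or.inl (by omega)
  simp [Char.toNat_ofNat, hv]

lemma pvChar_eq_ofNat (c : Char) (m : Nat) (h : m ≤ 127) : c = Char.ofNat m ↔ c.toNat = m := by
  rw [pvChar_eq_iff_toNat, pvToNat_ofNat m h]

lemma pvDvW_eq (c : Char) : pvDvW c = (c.toNat : Int) - 48 := by
  unfold pvDvW; rw [Int.subNatNat_eq_coe]; norm_num

lemma pvAscWin_eq (v : Nat) : pvAscWin v =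
    [Char.ofNat (48 + v + 0), Char.ofNat (48 + v + 1), Char.ofNat (48 + v + 2), Char.ofNat (48 + v + 3)] := rfl

lemma pvAscWinRev_eq (v : Nat) : (pvAscWin v).reverse =
    [Char.ofNat (48 + v + 3), Char.ofNat (48 + v + 2), Char.ofNat (48 + v + 1), Char.ofNat (48 + v + 0)] := by
  rw [pvAscWin_eq]; rfl

lemma pvDescWin_eq (v : Nat) : pvDescWin v = [pvW v 0, pvW v 1, pvW v 2, pvW v 3] := rfl

lemma pvW_toNat (v k : Nat) : (pvW v k).toNat = 48 + (v + 10 - k) % 10 := by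
  unfold pvW
  exact pvToNat_ofNat _ (by omega)

lemma pvModTen (x : Int) : PySem.Int.mod x 10 = x % 10 :=
  PySem.Int.mod_eq_emod_of_pos (by norm_num)

lemma pvHeadA (c : Char) (r : List Char) :
    (pvDigW c && pvContA r (pvDvW c) 3) = true ↔ ∃ v < 7, (pvAscWin v).IsPrefix (c :: r) := by
  constructor
  · intro h
    simp only [Bool.and_eq_true] at h
    obtain ⟨hd, hcont⟩ := h
    rcases r with _ | ⟨a1, r1⟩
    · simp [pvContA] at hcont
    rcases r1 with _ | ⟨a2, r2⟩
    · simp [pvContA] at hcont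
    rcases r2 with _ | ⟨a3, r3⟩
    · simp [pvContA] at hcont
    simp only [pvContA, Bool.and_eq_true, beq_iff_eq] at hcont
    obtain ⟨⟨hd1, he1⟩, ⟨hd2, he2⟩, ⟨hd3, he3⟩, -⟩ := hcont
    have hc := (pvDigW_iff c).1 hd
    have h1 := (pvDigW_iff a1).1 hd1
    have h2 := (pvDigW_iff a2).1 hd2
    have h3 := (pvDigW_iff a3).1 hd3
    rw [pvDvW_eq, pvDvW_eq] at he1
    rw [pvDvW_eq, pvDvW_eq] at he2
    rw [pvDvW_eq, pvDvW_eq] at he3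
    refine ⟨c.toNat - 48, by omega, r3, ?_⟩
    rw [pvAscWin_eq]
    have e0 : Char.ofNat (48 + (c.toNat - 48) + 0) = c :=
      ((pvChar_eq_ofNat c _ (by omega)).2 (by omega)).symm
    have e1 : Char.ofNat (48 + (c.toNat - 48) + 1) = a1 :=
      ((pvChar_eq_ofNat a1 _ (by omega)).2 (by omega)).symm
    have e2 : Char.ofNat (48 + (c.toNat - 48) + 2) = a2 :=
      ((pvChar_eq_ofNat a2 _ (by omega)).2 (by omega)).symm
    have e3 : Char.ofNat (48 + (c.toNat - 48) + 3) = a3 :=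
      ((pvChar_eq_ofNat a3 _ (by omega)).2 (by omega)).symm
    rw [e0, e1, e2, e3]
    rfl
  · rintro ⟨v, hv, t, ht⟩
    rw [pvAscWin_eq] at ht
    simp only [List.cons_append] at ht
    injection ht with hc hr
    subst hc
    have t0 : (Char.ofNat (48 + v + 0)).toNat = 48 + v + 0 := pvToNat_ofNat _ (by omega)
    have t1 : (Char.ofNat (48 + v + 1)).toNat = 48 + v + 1 := pvToNat_ofNat _ (by omega)
    have t2 : (Char.ofNat (48 + v + 2)).toNat = 48 + v + 2 := pvToNat_ofNat _ (by omega)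
    have t3 : (Char.ofNat (48 + v + 3)).toNat = 48 + v + 3 := pvToNat_ofNat _ (by omega)
    have d0 : pvDigW (Char.ofNat (48 + v + 0)) = true := (pvDigW_iff _).2 (by rw [t0]; omega)
    have d1 : pvDigW (Char.ofNat (48 + v + 1)) = true := (pvDigW_iff _).2 (by rw [t1]; omega)
    have d2 : pvDigW (Char.ofNat (48 + v + 2)) = true := (pvDigW_iff _).2 (by rw [t2]; omega)
    have d3 : pvDigW (Char.ofNat (48 + v + 3)) = true := (pvDigW_iff _).2 (by rw [t3]; omega)
    have b1 : (pvDvW (Char.ofNat (48 + v + 1)) == pvDvW (Char.ofNat (48 + v + 0)) + 1) = true := by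
      rw [beq_iff_eq, pvDvW_eq, pvDvW_eq, t0, t1]; omega
    have b2 : (pvDvW (Char.ofNat (48 + v + 2)) == pvDvW (Char.ofNat (48 + v + 0)) + 1 + 1) = true := by
      rw [beq_iff_eq, pvDvW_eq, pvDvW_eq, t0, t2]; omega
    have b3 : (pvDvW (Char.ofNat (48 + v + 3)) == pvDvW (Char.ofNat (48 + v + 0)) + 1 + 1 + 1) = true := by
      rw [beq_iff_eq, pvDvW_eq, pvDvW_eq, t0, t3]; omega
    rw [← hr]
    rw [beq_iff_eq] at b1 b2 b3
    simp only [Nat.add_zero] at t0 d0 b1 b2 b3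
    simp [pvContA, d0, d1, d2, d3, b1, b2, b3]

lemma pvHeadDn (c : Char) (r : List Char) :
    (pvDigW c && pvContDn r (pvDvW c) 3) = true ↔ ∃ v < 7, ((pvAscWin v).reverse).IsPrefix (c :: r) := by
  constructor
  · intro h
    simp only [Bool.and_eq_true] at h
    obtain ⟨hd, hcont⟩ := h
    rcases r with _ | ⟨a1, r1⟩
    · simp [pvContDn] at hcont
    rcases r1 with _ | ⟨a2, r2⟩
    · simp [pvContDn] at hcont
    rcases r2 with _ | ⟨a3, r3⟩
    · simp [pvContDn] at hcont
    simp only [pvContDn, Bool.and_eq_true, beq_iff_eq] at hcont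
    obtain ⟨⟨hd1, he1⟩, ⟨hd2, he2⟩, ⟨hd3, he3⟩, -⟩ := hcont
    have hc := (pvDigW_iff c).1 hd
    have h1 := (pvDigW_iff a1).1 hd1
    have h2 := (pvDigW_iff a2).1 hd2
    have h3 := (pvDigW_iff a3).1 hd3
    rw [pvDvW_eq, pvDvW_eq] at he1
    rw [pvDvW_eq, pvDvW_eq] at he2
    rw [pvDvW_eq, pvDvW_eq] at he3
    refine ⟨c.toNat - 51, by omega, r3, ?_⟩
    rw [pvAscWinRev_eq]
    have e0 : Char.ofNat (48 + (c.toNat - 51) + 3) = c :=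
      ((pvChar_eq_ofNat c _ (by omega)).2 (by omega)).symm
    have e1 : Char.ofNat (48 + (c.toNat - 51) + 2) = a1 :=
      ((pvChar_eq_ofNat a1 _ (by omega)).2 (by omega)).symm
    have e2 : Char.ofNat (48 + (c.toNat - 51) + 1) = a2 :=
      ((pvChar_eq_ofNat a2 _ (by omega)).2 (by omega)).symm
    have e3 : Char.ofNat (48 + (c.toNat - 51) + 0) = a3 :=
      ((pvChar_eq_ofNat a3 _ (by omega)).2 (by omega)).symm
    rw [e0, e1, e2, e3]
    rfl
  · rintro ⟨v, hv, t, ht⟩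
    rw [pvAscWinRev_eq] at ht
    simp only [List.cons_append] at ht
    injection ht with hc hr
    subst hc
    have t0 : (Char.ofNat (48 + v + 0)).toNat = 48 + v + 0 := pvToNat_ofNat _ (by omega)
    have t1 : (Char.ofNat (48 + v + 1)).toNat = 48 + v + 1 := pvToNat_ofNat _ (by omega)
    have t2 : (Char.ofNat (48 + v + 2)).toNat = 48 + v + 2 := pvToNat_ofNat _ (by omega)
    have t3 : (Char.ofNat (48 + v + 3)).toNat = 48 + v + 3 := pvToNat_ofNat _ (by omega)
    have d0 : pvDigW (Char.ofNat (48 + v + 0)) = true := (pvDigW_iff _).2 (by rw [t0]; omega)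
    have d1 : pvDigW (Char.ofNat (48 + v + 1)) = true := (pvDigW_iff _).2 (by rw [t1]; omega)
    have d2 : pvDigW (Char.ofNat (48 + v + 2)) = true := (pvDigW_iff _).2 (by rw [t2]; omega)
    have d3 : pvDigW (Char.ofNat (48 + v + 3)) = true := (pvDigW_iff _).2 (by rw [t3]; omega)
    have b1 : (pvDvW (Char.ofNat (48 + v + 2)) == pvDvW (Char.ofNat (48 + v + 3)) - 1) = true := by
      rw [beq_iff_eq, pvDvW_eq, pvDvW_eq, t2, t3]; omega
    have b2 : (pvDvW (Char.ofNat (48 + v + 1)) == pvDvW (Char.ofNat (48 + v + 3)) - 1 - 1) = true := by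
      rw [beq_iff_eq, pvDvW_eq, pvDvW_eq, t1, t3]; omega
    have b3 : (pvDvW (Char.ofNat (48 + v + 0)) == pvDvW (Char.ofNat (48 + v + 3)) - 1 - 1 - 1) = true := by
      rw [beq_iff_eq, pvDvW_eq, pvDvW_eq, t0, t3]; omega
    rw [← hr]
    rw [beq_iff_eq] at b1 b2 b3
    simp only [Nat.add_zero] at t0 d0 b1 b2 b3
    simp [pvContDn, d0, d1, d2, d3, b1, b2, b3]

lemma pvHeadD (c : Char) (r : List Char) :
    (pvDigW c && pvContD r (pvDvW c) 3) = true ↔ ∃ v < 10, (pvDescWin v).IsPrefix (c :: r) := by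
  constructor
  · intro h
    simp only [Bool.and_eq_true] at h
    obtain ⟨hd, hcont⟩ := h
    rcases r with _ | ⟨a1, r1⟩
    · simp [pvContD] at hcont
    rcases r1 with _ | ⟨a2, r2⟩
    · simp [pvContD] at hcont
    rcases r2 with _ | ⟨a3, r3⟩
    · simp [pvContD] at hcont
    simp only [pvContD, Bool.and_eq_true, beq_iff_eq] at hcont
    obtain ⟨⟨hd1, he1⟩, ⟨hd2, he2⟩, ⟨hd3, he3⟩, -⟩ := hcont
    have hc := (pvDigW_iff c).1 hd
    have h1 := (pvDigW_iff a1).1 hd1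
    have h2 := (pvDigW_iff a2).1 hd2
    have h3 := (pvDigW_iff a3).1 hd3
    rw [pvModTen, pvDvW_eq, pvDvW_eq] at he1
    rw [pvModTen, pvModTen, pvDvW_eq, pvDvW_eq] at he2
    rw [pvModTen, pvModTen, pvModTen, pvDvW_eq, pvDvW_eq] at he3
    refine ⟨c.toNat - 48, by omega, r3, ?_⟩
    rw [pvDescWin_eq]
    have e0 : pvW (c.toNat - 48) 0 = c := by
      rw [pvChar_eq_iff_toNat, pvW_toNat]
      omega
    have e1 : pvW (c.toNat - 48) 1 = a1 := by
      rw [pvChar_eq_iff_toNat, pvW_toNat]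
      omega
    have e2 : pvW (c.toNat - 48) 2 = a2 := by
      rw [pvChar_eq_iff_toNat, pvW_toNat]
      omega
    have e3 : pvW (c.toNat - 48) 3 = a3 := by
      rw [pvChar_eq_iff_toNat, pvW_toNat]
      omega
    rw [e0, e1, e2, e3]
    rfl
  · rintro ⟨v, hv, t, ht⟩
    rw [pvDescWin_eq] at ht
    simp only [List.cons_append] at ht
    injection ht with hc hr
    subst hc
    have t0 : (pvW v 0).toNat = 48 + (v + 10 - 0) % 10 := pvW_toNat _ _
    have t1 : (pvW v 1).toNat = 48 + (v + 10 - 1) % 10 := pvW_toNat _ _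
    have t2 : (pvW v 2).toNat = 48 + (v + 10 - 2) % 10 := pvW_toNat _ _
    have t3 : (pvW v 3).toNat = 48 + (v + 10 - 3) % 10 := pvW_toNat _ _
    have d0 : pvDigW (pvW v 0) = true := (pvDigW_iff _).2 (by rw [t0]; omega)
    have d1 : pvDigW (pvW v 1) = true := (pvDigW_iff _).2 (by rw [t1]; omega)
    have d2 : pvDigW (pvW v 2) = true := (pvDigW_iff _).2 (by rw [t2]; omega)
    have d3 : pvDigW (pvW v 3) = true := (pvDigW_iff _).2 (by rw [t3]; omega)
    have b1 : (pvDvW (pvW v 1) == PySem.Int.mod (pvDvW (pvW v 0) - 1) 10) = true := by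
      rw [beq_iff_eq, pvModTen, pvDvW_eq, pvDvW_eq, t0, t1]; omega
    have b2 : (pvDvW (pvW v 2) ==
        PySem.Int.mod (PySem.Int.mod (pvDvW (pvW v 0) - 1) 10 - 1) 10) = true := by
      rw [beq_iff_eq, pvModTen, pvModTen, pvDvW_eq, pvDvW_eq, t0, t2]; omega
    have b3 : (pvDvW (pvW v 3) ==
        PySem.Int.mod (PySem.Int.mod (PySem.Int.mod (pvDvW (pvW v 0) - 1) 10 - 1) 10 - 1) 10) = true := by
      rw [beq_iff_eq, pvModTen, pvModTen, pvModTen, pvDvW_eq, pvDvW_eq, t0, t3]; omega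
    rw [← hr]
    rw [beq_iff_eq] at b1 b2 b3
    simp [pvContD, d0, d1, d2, d3, b1, b2, b3]

lemma pvExists_infix_cons (W : Nat → List Char) (n : Nat) (c : Char) (r : List Char) :
    (∃ v < n, (W v).IsInfix (c :: r)) ↔
      ((∃ v < n, (W v).IsPrefix (c :: r)) ∨ ∃ v < n, (W v).IsInfix r) := by
  constructor
  · rintro ⟨v, hv, h⟩
    rcases (List.infix_cons_iff).1 h with h | h
    · exact Or.inl ⟨v, hv, h⟩
    · exact Or.inr ⟨v, hv, h⟩
  · rintro (⟨v, hv, h⟩ | ⟨v, hv, h⟩)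
    · exact ⟨v, hv, h.isInfix⟩
    · exact ⟨v, hv, (List.infix_cons_iff).2 (Or.inr h)⟩

lemma pvHasA_iff (l : List Char) : pvHasA l = true ↔ ∃ v < 7, (pvAscWin v).IsInfix l := by
  induction l with
  | nil =>
    constructor
    · intro h; exact absurd h (by simp [pvHasA])
    · rintro ⟨v, hv, h⟩
      rw [List.infix_nil] at h
      rw [pvAscWin_eq] at h
      exact absurd h (by simp)
  | cons c r ih =>
    rw [pvExists_infix_cons]
    simp only [pvHasA, Bool.or_eq_true]
    exact or_congr (pvHeadA c r) ih

lemma pvHasDn_iff (l : List Char) : pvHasDn l = true ↔ ∃ v < 7, ((pvAscWin v).reverse).IsInfix l := by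
  induction l with
  | nil =>
    constructor
    · intro h; exact absurd h (by simp [pvHasDn])
    · rintro ⟨v, hv, h⟩
      rw [List.infix_nil] at h
      rw [pvAscWinRev_eq] at h
      exact absurd h (by simp)
  | cons c r ih =>
    rw [pvExists_infix_cons]
    simp only [pvHasDn, Bool.or_eq_true]
    exact or_congr (pvHeadDn c r) ih

lemma pvHasD_iff (l : List Char) : pvHasD l = true ↔ ∃ v < 10, (pvDescWin v).IsInfix l := by
  induction l with
  | nil =>
    constructor
    · intro h; exact absurd h (by simp [pvHasD])
    · rintro ⟨v, hv, h⟩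
      rw [List.infix_nil] at h
      rw [pvDescWin_eq] at h
      exact absurd h (by simp)
  | cons c r ih =>
    rw [pvExists_infix_cons]
    simp only [pvHasD, Bool.or_eq_true]
    exact or_congr (pvHeadD c r) ih

lemma pvDescWin_rev (v : Nat) (h3 : 3 ≤ v) (h9 : v ≤ 9) :
    pvDescWin v = (pvAscWin (v - 3)).reverse := by
  interval_cases v <;> decide

lemma pvD_iff (t : String) : D_number_sequence t ↔
    (pvHasD t.toList = true ∧ pvHasA t.toList = false ∧ pvHasDn t.toList = false) := by
  unfold D_number_sequence
  rw [pvWrap3_iff, pvPlain14_iff]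
  constructor
  · rintro ⟨⟨v, hv, hw⟩, hA, hDn⟩
    refine ⟨(pvHasD_iff _).2 ⟨v, by omega, hw⟩, ?_, ?_⟩
    · cases h : pvHasA t.toList with
      | false => rfl
      | true =>
        obtain ⟨v', hv', hw'⟩ := (pvHasA_iff _).1 h
        exact absurd hw' (hA v' hv')
    · cases h : pvHasDn t.toList with
      | false => rfl
      | true =>
        obtain ⟨v', hv', hw'⟩ := (pvHasDn_iff _).1 h
        exact absurd hw' (hDn v' hv')
  · rintro ⟨hD, hA, hDn⟩
    obtain ⟨v, hv, hw⟩ := (pvHasD_iff _).1 hD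
    refine ⟨?_, ?_, ?_⟩
    · by_cases h3 : v < 3
      · exact ⟨v, h3, hw⟩
      · exfalso
        have hrev := pvDescWin_rev v (by omega) (by omega)
        have : pvHasDn t.toList = true :=
          (pvHasDn_iff _).2 ⟨v - 3, by omega, by rw [← hrev]; exact hw⟩
        rw [this] at hDn
        exact Bool.noConfusion hDn
    · intro v' hv' hw'
      have : pvHasA t.toList = true := (pvHasA_iff _).2 ⟨v', hv', hw'⟩
      rw [this] at hA
      exact Bool.noConfusion hA
    · intro v' hv' hw'
      have : pvHasDn t.toList = true := (pvHasDn_iff _).2 ⟨v', hv', hw'⟩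
      rw [this] at hDn
      exact Bool.noConfusion hDn

-- ===== VERDICT (by name: the statements are the Claim_ definitions above) =====
theorem number_sequence_spec : Claim_unchanged_number_sequence := by
  intro t _ hnd
  rw [pvA_repr, pvB_repr]
  cases hA : pvHasA t.toList with
  | true => rfl
  | false =>
    cases hDn : pvHasDn t.toList with
    | true => rw [pvHasDn_imp_hasD _ hDn]
    | false =>
      cases hD : pvHasD t.toList with
      | false => rfl
      | true => exact absurd ((pvD_iff t).2 ⟨hD, hA, hDn⟩) hnd

theorem number_sequence_changed : Claim_changed_number_sequence := by
  unfold Claim_changed_number_sequence; decide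

theorem number_sequence_tight : Claim_exact_number_sequence := by
  intro t _ hd
  obtain ⟨hD, hA, hDn⟩ := (pvD_iff t).1 hd
  rw [pvA_repr, pvB_repr, hD, hA, hDn]
  decide
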